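-- pv_equiv track=rewrite | github.com/ShinWon-Chul/AlgorithmWithPython | programmers/2021_카카오_채용연계형_인턴십/표 편집.py | solution
-- ===== SOURCE A (Python) =====
-- def solution(n, k, cmd):
--     linked_list = {}
--     for i in range(n):
--         if i == 0:
--             node = { 'data' : i, 'prev' : 'head', 'next' : i + 1 }
--         elif i == n-1:
--             node = { 'data' : i, 'prev' : i - 1, 'next' : 'tail'}
--         else:
--             node = { 'data' : i, 'prev' : i - 1, 'next' : i + 1}
--         linked_list[i] = node
--     result = ['O'] * n
--     curr = k
--     stack = []
--     for c in cmd: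
--         if len(c) >= 3:
--             c = c.split()
--             if c[0] == 'D':
--                 for _ in range(int(c[1])):
--                     next_node = linked_list[curr]['next']
--                     curr = linked_list[next_node]['data']
--             elif c[0] == 'U':
--                 for _ in range(int(c[1])):
--                     prev_node = linked_list[curr]['prev']
--                     curr = linked_list[prev_node]['data']
--         else:
--
--             if c == 'C':
--                 if linked_list[curr]['next'] == 'tail':
--                     result[linked_list[curr]['data']] = 'X'
--                     stack.append(linked_list[curr])
--                     linked_list[linked_list[curr]['prev']]['next'] = 'tail'
--                     curr = linked_list[linked_list[curr]['prev']]['data']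
--                 elif linked_list[curr]['prev'] == 'head':
--                     result[linked_list[curr]['data']] = 'X'
--                     stack.append(linked_list[curr])
--                     linked_list[linked_list[curr]['next']]['prev'] = 'head'
--                     curr = linked_list[linked_list[curr]['next']]['data']
--                 else :
--                     result[linked_list[curr]['data']] = 'X'
--                     stack.append(linked_list[curr])
--                     linked_list[linked_list[curr]['next']]['prev'] = linked_list[curr]['prev']
--                     linked_list[linked_list[curr]['prev']]['next'] = linked_list[curr]['next']
--                     curr = linked_list[linked_list[curr]['next']]['data']
--
--             elif c == 'Z':
--                 node = stack.pop()
--                 if node['next'] == 'tail':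
--                     linked_list[node['prev']]['next'] = node['data']
--                     result[node['data']] = 'O'
--                 elif node['prev'] == 'head':
--                     linked_list[node['next']]['prev'] = node['data']
--                     result[node['data']] = 'O'
--                 else:
--                     linked_list[node['prev']]['next'] = node['data']
--                     linked_list[node['next']]['prev'] = node['data']
--                     result[node['data']] = 'O'
--
--     return ''.join(result)
-- ===== SOURCE B (Python) =====
-- def _next(res, i):
--     for j in range(i + 1, len(res)):
--         if res[j] == 'O':
--             return j
--     return None
--
-- def _prev(res, i):
--     for j in range(i - 1, -1, -1):
--         if res[j] == 'O':
--             return j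
--     return None
--
-- def solution(n, k, cmd):
--     res = ['O'] * n
--     curr = k
--     stack = []
--     for c in cmd:
--         if len(c) >= 3:
--             t = c.split()
--             if t[0] == 'D':
--                 for _ in range(int(t[1])):
--                     curr = _next(res, curr)
--             elif t[0] == 'U':
--                 for _ in range(int(t[1])):
--                     curr = _prev(res, curr)
--         elif c == 'C':
--             res[curr] = 'X'
--             stack.append(curr)
--             nj = _next(res, curr)
--             curr = nj if nj is not None else _prev(res, curr)
--         elif c == 'Z':
--             i = stack.pop()
--             res[i] = 'O'
--     return ''.join(res)
-- ===== Notes on version B (the rewrite author's own statement) =====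
-- stated objective: simpler
-- what changed: A simulates the table as a doubly linked list of per-row dict nodes with pointer surgery on delete/undo; B keeps only the 'O'/'X' mark list plus an undo stack of indices, finds neighbours by linear skip-scans, and delete/undo become single mark flips.
import Mathlib
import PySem

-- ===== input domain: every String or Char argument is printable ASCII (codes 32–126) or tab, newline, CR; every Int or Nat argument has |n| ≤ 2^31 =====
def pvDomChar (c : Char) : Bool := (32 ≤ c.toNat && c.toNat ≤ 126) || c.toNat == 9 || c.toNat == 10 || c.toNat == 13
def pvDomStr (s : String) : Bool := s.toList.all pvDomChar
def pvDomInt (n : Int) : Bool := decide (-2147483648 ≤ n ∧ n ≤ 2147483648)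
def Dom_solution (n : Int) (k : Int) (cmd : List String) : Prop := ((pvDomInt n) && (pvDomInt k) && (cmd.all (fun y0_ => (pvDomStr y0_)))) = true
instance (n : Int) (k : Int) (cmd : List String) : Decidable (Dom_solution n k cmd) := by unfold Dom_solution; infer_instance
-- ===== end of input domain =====

-- B replaces A's doubly linked list of dict nodes by a plain 'O'/'X' mark list with
-- linear skip-scans for the neighbour moves (simpler: no per-row nodes or pointer surgery;
-- a timing run also measured it faster by a constant factor).

-- ===== PORT A =====
-- the pointer values of a node: an index, or the sentinels 'head' / 'tail'
inductive Link where
  | head : Link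
  | tail : Link
  | idx  : Int → Link
deriving DecidableEq, Repr

structure Node where
  data : Int
  prev : Link
  next : Link
deriving DecidableEq, Repr

def dummyNode : Node := ⟨0, .head, .head⟩

-- linked_list[i] for an Int key (Python raises KeyError when absent: outside Pre_)
def getI (d : PySem.Dict Int Node) (i : Int) : Node := PySem.Dict.getD d i dummyNode

-- linked_list[l] for a pointer value ('head'/'tail' keys raise KeyError in Python: outside Pre_)
def getL (d : PySem.Dict Int Node) (l : Link) : Node :=
  match l with
  | .idx i => getI d i
  | _ => dummyNode

-- linked_list[l][field] = … (mutating a node in place; 'head'/'tail' keys raise KeyError: outside Pre_)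
def updL (d : PySem.Dict Int Node) (l : Link) (f : Node → Node) : PySem.Dict Int Node :=
  match l with
  | .idx i => PySem.Dict.modify d i dummyNode f
  | _ => d

-- the construction loop 'for i in range(n): … linked_list[i] = node'
def initA (n : Int) : PySem.Dict Int Node :=
  (PySem.List.pyRange 0 n 1).foldl (fun d i =>
    let node : Node :=
      if i = 0 then ⟨i, .head, .idx (i + 1)⟩
      else if i = n - 1 then ⟨i, .idx (i - 1), .tail⟩
      else ⟨i, .idx (i - 1), .idx (i + 1)⟩
    d.insert i node) PySem.Dict.empty

structure AState where
  d : PySem.Dict Int Node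
  res : List Char
  curr : Int
  stack : List Node

def stepA (st : AState) (c : String) : AState :=
  if 3 ≤ PySem.Str.len c then
    let t := PySem.Str.split₀ c
    -- t.headD "" : Python c[0] raises IndexError on an all-whitespace command (outside Pre_)
    if t.headD "" = "D" then
      match PySem.Int.ofStr? (t.getD 1 "") with  -- int() ValueError / c[1] IndexError: outside Pre_
      | some x =>
        let cu' := (List.range x.toNat).foldl (fun cu _ => (getL st.d (getI st.d cu).next).data) st.curr
        { st with curr := cu' }
      | none => st
    else if t.headD "" = "U" then
      match PySem.Int.ofStr? (t.getD 1 "") with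
      | some x =>
        let cu' := (List.range x.toNat).foldl (fun cu _ => (getL st.d (getI st.d cu).prev).data) st.curr
        { st with curr := cu' }
      | none => st
    else st
  else
    if c = "C" then
      let cur := getI st.d st.curr
      let res1 := PySem.List.pySetD st.res cur.data 'X'
      let stack1 := st.stack ++ [cur]
      if cur.next = .tail then
        let d1 := updL st.d cur.prev (fun nd => { nd with next := .tail })
        let cur2 := getI d1 st.curr
        { d := d1, res := res1, curr := (getL d1 cur2.prev).data, stack := stack1 }
      else if cur.prev = .head then
        let d1 := updL st.d cur.next (fun nd => { nd with prev := .head })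
        let cur2 := getI d1 st.curr
        { d := d1, res := res1, curr := (getL d1 cur2.next).data, stack := stack1 }
      else
        let d1 := updL st.d cur.next (fun nd => { nd with prev := cur.prev })
        let cur2 := getI d1 st.curr
        let d2 := updL d1 cur2.prev (fun nd => { nd with next := cur2.next })
        let cur3 := getI d2 st.curr
        { d := d2, res := res1, curr := (getL d2 cur3.next).data, stack := stack1 }
    else if c = "Z" then
      match PySem.List.pop? st.stack (-1) with  -- pop from empty list raises IndexError: outside Pre_
      | none => st
      | some (node, stack1) =>
        if node.next = .tail then
          { st with d := updL st.d node.prev (fun nd => { nd with next := .idx node.data }),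
                    res := PySem.List.pySetD st.res node.data 'O', stack := stack1 }
        else if node.prev = .head then
          { st with d := updL st.d node.next (fun nd => { nd with prev := .idx node.data }),
                    res := PySem.List.pySetD st.res node.data 'O', stack := stack1 }
        else
          let d1 := updL st.d node.prev (fun nd => { nd with next := .idx node.data })
          let d2 := updL d1 node.next (fun nd => { nd with prev := .idx node.data })
          { st with d := d2, res := PySem.List.pySetD st.res node.data 'O', stack := stack1 }
    else st

def solution (n : Int) (k : Int) (cmd : List String) : String :=
  let st := cmd.foldl stepA ⟨initA n, List.replicate n.toNat 'O', k, []⟩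
  String.ofList st.res  -- ''.join(result) of one-character strings

-- ===== PORT B =====
-- res[j] == 'O'  (a negative or too-large j is never reached inside Pre_)
def aliveC (res : List Char) (j : Int) : Bool := PySem.List.pyGetD res j 'X' == 'O'

-- _next: first marked-alive index right of i (None = Python's fall-through return None)
def nxtB (res : List Char) (i : Int) : Option Int :=
  (PySem.List.pyRange (i + 1) (res.length : Int) 1).find? (aliveC res)

-- _prev: first marked-alive index left of i
def prvB (res : List Char) (i : Int) : Option Int :=
  (PySem.List.pyRange (i - 1) (-1) (-1)).find? (aliveC res)

structure BState where
  res : List Char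
  curr : Int
  stack : List Int

def stepB (st : BState) (c : String) : BState :=
  if 3 ≤ PySem.Str.len c then
    let t := PySem.Str.split₀ c
    if t.headD "" = "D" then
      match PySem.Int.ofStr? (t.getD 1 "") with
      | some x =>
        let cu' := (List.range x.toNat).foldl (fun cu _ => (nxtB st.res cu).getD cu) st.curr
        { st with curr := cu' }  -- getD cu: Python's None only outside Pre_
      | none => st
    else if t.headD "" = "U" then
      match PySem.Int.ofStr? (t.getD 1 "") with
      | some x =>
        let cu' := (List.range x.toNat).foldl (fun cu _ => (prvB st.res cu).getD cu) st.curr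
        { st with curr := cu' }
      | none => st
    else st
  else
    if c = "C" then
      let res1 := PySem.List.pySetD st.res st.curr 'X'
      let stack1 := st.stack ++ [st.curr]
      let curr1 :=
        match nxtB res1 st.curr with
        | some j => j
        | none => (prvB res1 st.curr).getD st.curr  -- getD: Python's None only outside Pre_
      { res := res1, curr := curr1, stack := stack1 }
    else if c = "Z" then
      match PySem.List.pop? st.stack (-1) with
      | none => st
      | some (i, stack1) => { st with res := PySem.List.pySetD st.res i 'O', stack := stack1 }
    else st

def solution_alt (n : Int) (k : Int) (cmd : List String) : String :=
  let st := cmd.foldl stepB ⟨List.replicate n.toNat 'O', k, []⟩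
  String.ofList st.res

-- ===== PRECONDITION & SPEC =====
-- Pre_ excludes exactly the inputs on which Python A raises: a 'D x'/'U x' whose moves walk
-- past the first/last remaining row (KeyError on the 'head'/'tail' sentinel), a 'C' when the
-- current row is invalid or is the only remaining row (KeyError), a 'Z' with an empty undo
-- stack (IndexError), a non-integer 'D'/'U' argument (ValueError/IndexError), and an
-- all-whitespace command of length ≥ 3 (IndexError on c.split()[0]).  Whether A raises is
-- inherently a property of the navigation state, so Pre_ replays the commands over the minimal
-- abstract state (current row, stack of deleted row indices); it computes no output of either port.
def preNxt (n : Int) (stk : List Int) (i : Int) : Option Int :=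
  ((PySem.List.pyRange (i + 1) n 1).filter (fun j => !stk.contains j)).head?

def prePrv (stk : List Int) (i : Int) : Option Int :=
  ((PySem.List.pyRange (i - 1) (-1) (-1)).filter (fun j => !stk.contains j)).head?

def preMove (n : Int) (stk : List Int) (dir : Bool) : Nat → Int → Option Int
  | 0, c => some c
  | m + 1, c =>
    if 0 ≤ c ∧ c < n ∧ ¬ stk.contains c then
      match (if dir then preNxt n stk c else prePrv stk c) with
      | some j => preMove n stk dir m j
      | none => none
    else none

def preStep (n : Int) (st : Option (Int × List Int)) (c : String) : Option (Int × List Int) :=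
  match st with
  | none => none
  | some (cur, stk) =>
    if 3 ≤ PySem.Str.len c then
      match PySem.Str.split₀ c with
      | [] => none
      | t0 :: rest =>
        if t0 = "D" ∨ t0 = "U" then
          match rest.head? with
          | none => none
          | some t1 =>
            match PySem.Int.ofStr? t1 with
            | none => none
            | some x => (preMove n stk (t0 == "D") x.toNat cur).map (fun c' => (c', stk))
        else some (cur, stk)
    else if c = "C" then
      if 0 ≤ cur ∧ cur < n ∧ ¬ stk.contains cur then
        match preNxt n stk cur with
        | some j => some (j, cur :: stk)
        | none =>
          match prePrv stk cur with
          | some j => some (j, cur :: stk)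
          | none => none
      else none
    else if c = "Z" then
      match stk with
      | [] => none
      | _ :: s => some (cur, s)
    else some (cur, stk)

def Pre_solution (n : Int) (k : Int) (cmd : List String) : Prop :=
  (cmd.foldl (preStep n) (some (k, []))).isSome = true

instance (n : Int) (k : Int) (cmd : List String) : Decidable (Pre_solution n k cmd) := by
  unfold Pre_solution; infer_instance

def pvWitness_solution : Int × Int × List String := (4, 1, ["D 2", "C", "U 2", "Z"])

def Spec_solution (n : Int) (k : Int) (cmd : List String) (out : String) : Prop := out = solution_alt n k cmd
instance (n : Int) (k : Int) (cmd : List String) (out : String) : Decidable (Spec_solution n k cmd out) := by unfold Spec_solution; infer_instance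

-- ===== CLAIM (what is proved, stated in full; the proofs are below) =====
def Claim_equal_solution : Prop := ∀ (n : Int) (k : Int) (cmd : List String), Dom_solution n k cmd → Pre_solution n k cmd → Spec_solution n k cmd (solution n k cmd)

-- ===== LEMMAS AND PROOFS =====

-- ---------- generic list lemmas ----------

theorem head?_filter {α : Type} (p : α → Bool) (l : List α) :
    (l.filter p).head? = l.find? p := by
  induction l with
  | nil => rfl
  | cons x xs ih => by_cases h : p x <;> simp [List.find?, h, ih]

theorem find?_congr' {α : Type} {p q : α → Bool} (l : List α)
    (h : ∀ x ∈ l, p x = q x) : l.find? p = l.find? q := by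
  induction l with
  | nil => rfl
  | cons x xs ih =>
    simp only [List.find?]
    rw [h x (by simp)]
    by_cases hq : q x <;> simp [hq, ih (fun y hy => h y (by simp [hy]))]

theorem foldl_const_iterate {α β : Type} (g : α → α) (l : List β) (c0 : α) :
    l.foldl (fun c _ => g c) c0 = g^[l.length] c0 := by
  induction l generalizing c0 with
  | nil => rfl
  | cons x xs ih => simp [List.foldl, ih, Function.iterate_succ_apply]

-- ---------- find? over integer ranges ----------

theorem find?_pyRange_one_some {p : Int → Bool} {a b j : Int} :
    ((PySem.List.pyRange a b 1).find? p = some j) ↔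
      (a ≤ j ∧ j < b ∧ p j = true ∧ ∀ t, a ≤ t → t < j → p t = false) := by
  generalize hm : (b - a).toNat = m
  induction m generalizing a with
  | zero =>
    rw [PySem.List.pyRange_one_eq_nil (by omega)]
    simp only [List.find?]
    constructor
    · intro h; cases h
    · rintro ⟨h1, h2, -, -⟩; omega
  | succ m ih =>
    rw [PySem.List.pyRange_one_cons (by omega)]
    simp only [List.find?]
    by_cases hpa : p a
    · simp only [hpa, Option.some.injEq]
      constructor
      · rintro rfl; exact ⟨le_refl _, by omega, hpa, by omega⟩
      · rintro ⟨h1, h2, h3, h4⟩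
        rcases eq_or_lt_of_le h1 with rfl | h
        · rfl
        · exact absurd (h4 a (le_refl _) h) (by simp [hpa])
    · simp only [hpa]
      rw [ih (a := a + 1) (by omega)]
      constructor
      · rintro ⟨h1, h2, h3, h4⟩
        refine ⟨by omega, h2, h3, fun t ht1 ht2 => ?_⟩
        rcases eq_or_lt_of_le ht1 with rfl | h
        · simpa using hpa
        · exact h4 t (by omega) ht2
      · rintro ⟨h1, h2, h3, h4⟩
        have hja : j ≠ a := by rintro rfl; exact absurd h3 (by simpa using hpa)
        exact ⟨by omega, h2, h3, fun t ht1 ht2 => h4 t (by omega) ht2⟩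

theorem find?_pyRange_one_none {p : Int → Bool} {a b : Int} :
    ((PySem.List.pyRange a b 1).find? p = none) ↔
      (∀ t, a ≤ t → t < b → p t = false) := by
  rw [List.find?_eq_none]
  constructor
  · intro h t ht1 ht2
    have := h t (by rw [PySem.List.mem_pyRange_one]; omega)
    simpa using this
  · intro h x hx
    rw [PySem.List.mem_pyRange_one] at hx
    simp [h x hx.1 hx.2]

theorem find?_pyRange_neg_one_some {p : Int → Bool} {a b j : Int} :
    ((PySem.List.pyRange a b (-1)).find? p = some j) ↔
      (b < j ∧ j ≤ a ∧ p j = true ∧ ∀ t, j < t → t ≤ a → p t = false) := by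
  generalize hm : (a - b).toNat = m
  induction m generalizing a with
  | zero =>
    rw [PySem.List.pyRange_neg_one_eq_nil (by omega)]
    simp only [List.find?]
    constructor
    · intro h; cases h
    · rintro ⟨h1, h2, -, -⟩; omega
  | succ m ih =>
    rw [PySem.List.pyRange_neg_one_cons (by omega)]
    simp only [List.find?]
    by_cases hpa : p a
    · simp only [hpa, Option.some.injEq]
      constructor
      · rintro rfl; exact ⟨by omega, le_refl _, hpa, by omega⟩
      · rintro ⟨h1, h2, h3, h4⟩
        rcases eq_or_lt_of_le h2 with rfl | h
        · rfl
        · exact absurd (h4 a h (le_refl _)) (by simp [hpa])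
    · simp only [hpa]
      rw [ih (a := a - 1) (by omega)]
      constructor
      · rintro ⟨h1, h2, h3, h4⟩
        refine ⟨h1, by omega, h3, fun t ht1 ht2 => ?_⟩
        rcases eq_or_lt_of_le ht2 with rfl | h
        · simpa using hpa
        · exact h4 t ht1 (by omega)
      · rintro ⟨h1, h2, h3, h4⟩
        have hja : j ≠ a := by rintro rfl; exact absurd h3 (by simpa using hpa)
        exact ⟨h1, by omega, h3, fun t ht1 ht2 => h4 t ht1 (by omega)⟩

theorem find?_pyRange_neg_one_none {p : Int → Bool} {a b : Int} :
    ((PySem.List.pyRange a b (-1)).find? p = none) ↔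
      (∀ t, b < t → t ≤ a → p t = false) := by
  rw [List.find?_eq_none]
  constructor
  · intro h t ht1 ht2
    have := h t (by rw [PySem.List.mem_pyRange_neg_one]; omega)
    simpa using this
  · intro h x hx
    rw [PySem.List.mem_pyRange_neg_one] at hx
    simp [h x hx.1 hx.2]

-- ---------- aliveC / nxtB / prvB characterizations ----------

theorem nxtB_some {res : List Char} {i j : Int} :
    nxtB res i = some j ↔
      (i < j ∧ j < (res.length : Int) ∧ aliveC res j = true ∧
       ∀ t, i < t → t < j → aliveC res t = false) := by
  unfold nxtB
  rw [find?_pyRange_one_some]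
  constructor
  · rintro ⟨h1, h2, h3, h4⟩; exact ⟨by omega, h2, h3, fun t ht1 ht2 => h4 t (by omega) ht2⟩
  · rintro ⟨h1, h2, h3, h4⟩; exact ⟨by omega, h2, h3, fun t ht1 ht2 => h4 t (by omega) ht2⟩

theorem nxtB_none {res : List Char} {i : Int} :
    nxtB res i = none ↔ ∀ t, i < t → t < (res.length : Int) → aliveC res t = false := by
  unfold nxtB
  rw [find?_pyRange_one_none]
  constructor
  · intro h t ht1 ht2; exact h t (by omega) ht2
  · intro h t ht1 ht2; exact h t (by omega) ht2

theorem prvB_some {res : List Char} {i j : Int} :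
    prvB res i = some j ↔
      (0 ≤ j ∧ j < i ∧ aliveC res j = true ∧
       ∀ t, j < t → t < i → aliveC res t = false) := by
  unfold prvB
  rw [find?_pyRange_neg_one_some]
  constructor
  · rintro ⟨h1, h2, h3, h4⟩; exact ⟨by omega, by omega, h3, fun t ht1 ht2 => h4 t ht1 (by omega)⟩
  · rintro ⟨h1, h2, h3, h4⟩; exact ⟨by omega, by omega, h3, fun t ht1 ht2 => h4 t ht1 (by omega)⟩

theorem prvB_none {res : List Char} {i : Int} :
    prvB res i = none ↔ ∀ t, 0 ≤ t → t < i → aliveC res t = false := by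
  unfold prvB
  rw [find?_pyRange_neg_one_none]
  constructor
  · intro h t ht1 ht2; exact h t (by omega) (by omega)
  · intro h t ht1 ht2; exact h t (by omega) (by omega)

theorem aliveC_nonneg_eq {res : List Char} {t : Int} (ht : 0 ≤ t) :
    aliveC res t = (res.getD t.toNat 'X' == 'O') := by
  unfold aliveC
  rw [show t = ((t.toNat : Nat) : Int) by omega, PySem.List.pyGetD_natCast]
  simp [List.getD]
  rw [show (max t 0).toNat = t.toNat by omega]

theorem aliveC_set {res : List Char} {c t : Int} (v : Char)
    (hc0 : 0 ≤ c) (hcl : c < (res.length : Int)) (ht : 0 ≤ t) :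
    aliveC (PySem.List.pySetD res c v) t = if t = c then (v == 'O') else aliveC res t := by
  rw [aliveC_nonneg_eq ht, PySem.List.pySetD_of_nonneg res v hc0]
  conv_rhs => rw [aliveC_nonneg_eq (res := res) ht]
  by_cases h : t = c
  · subst h
    simp [List.getD, show t.toNat < res.length by omega]
  · have : t.toNat ≠ c.toNat := by omega
    simp [List.getD, List.getElem?_set, if_neg (Ne.symm this)]
    simp [h]

-- ---------- canonical nodes and the coupling invariant ----------

def canonPrev (res : List Char) (i : Int) : Link :=
  match prvB res i with
  | some j => .idx j
  | none => .head

def canonNext (res : List Char) (i : Int) : Link :=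
  match nxtB res i with
  | some j => .idx j
  | none => .tail

def canonNode (res : List Char) (i : Int) : Node := ⟨i, canonPrev res i, canonNext res i⟩

-- every in-range alive index has the canonical node in the dict
def AliveInv (n : Int) (res : List Char) (d : PySem.Dict Int Node) : Prop :=
  ∀ i : Int, 0 ≤ i → i < n → aliveC res i = true → getI d i = canonNode res i

-- the stacked (deleted) rows, top first: each holds the canonical node of the view in
-- which all rows deleted after it are revived again
def DeadInv (n : Int) : List Char → PySem.Dict Int Node → List Int → List Node → Prop
  | _, _, [], nds => nds = []
  | res, d, i :: s, nds =>
      ∃ nds', nds = canonNode res i :: nds' ∧ 0 ≤ i ∧ i < n ∧ aliveC res i = false ∧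
        getI d i = canonNode res i ∧
        DeadInv n (PySem.List.pySetD res i 'O') d s nds'

def SurjInv (n : Int) (res : List Char) (stkR : List Int) : Prop :=
  ∀ i : Int, 0 ≤ i → i < n → aliveC res i = false → i ∈ stkR

def CoupInv (n : Int) (a : AState) (b : BState) : Prop :=
  a.res = b.res ∧ a.curr = b.curr ∧ ((b.res.length : Int) = n) ∧
  AliveInv n b.res a.d ∧ DeadInv n b.res a.d b.stack.reverse a.stack.reverse ∧
  SurjInv n b.res b.stack.reverse

-- ---------- basic facts about DeadInv ----------

theorem DeadInv_bounds {n : Int} {res : List Char} {d : PySem.Dict Int Node}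
    {stkR : List Int} {nds : List Node}
    (h : DeadInv n res d stkR nds) : ∀ i ∈ stkR, 0 ≤ i ∧ i < n := by
  induction stkR generalizing res nds with
  | nil => intro i hi; cases hi
  | cons x s ih =>
    obtain ⟨nds', -, hx0, hxn, -, -, hrec⟩ := h
    intro i hi
    rcases List.mem_cons.mp hi with rfl | hi'
    · exact ⟨hx0, hxn⟩
    · exact ih hrec i hi'

theorem DeadInv_dead {n : Int} {res : List Char} {d : PySem.Dict Int Node}
    {stkR : List Int} {nds : List Node}
    (hlen : (res.length : Int) = n)
    (h : DeadInv n res d stkR nds) : ∀ i ∈ stkR, aliveC res i = false := by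
  induction stkR generalizing res nds with
  | nil => intro i hi; cases hi
  | cons x s ih =>
    obtain ⟨nds', -, hx0, hxn, hxd, -, hrec⟩ := h
    intro i hi
    rcases List.mem_cons.mp hi with rfl | hi'
    · exact hxd
    · have hlen' : ((PySem.List.pySetD res x 'O').length : Int) = n := by
        rw [PySem.List.length_pySetD]; exact hlen
      have := ih (res := PySem.List.pySetD res x 'O') (nds := nds') hlen' hrec i hi'
      -- dead in the revived view implies dead in res (reviving only turns marks to 'O')
      by_cases hix : i = x
      · subst hix
        rw [aliveC_set 'O' hx0 (by omega) hx0] at this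
        simp at this
      · have hi0 : 0 ≤ i := (DeadInv_bounds hrec i hi').1
        rw [aliveC_set 'O' hx0 (by omega) hi0] at this
        rwa [if_neg hix] at this

-- DeadInv only reads the dict at the stacked keys, which stay dead in every view;
-- modifying an alive key changes nothing
theorem DeadInv_congr {n : Int} {res : List Char} {d d' : PySem.Dict Int Node}
    {stkR : List Int} {nds : List Node}
    (h : DeadInv n res d stkR nds)
    (hsame : ∀ i ∈ stkR, getI d' i = getI d i) :
    DeadInv n res d' stkR nds := by
  induction stkR generalizing res nds with
  | nil => exact h
  | cons x s ih =>
    obtain ⟨nds', hnds, hx0, hxn, hxd, hget, hrec⟩ := h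
    exact ⟨nds', hnds, hx0, hxn, hxd, by rw [hsame x (by simp), hget],
      ih hrec (fun i hi => hsame i (by simp [hi]))⟩

-- ---------- dict update lemmas ----------

theorem getI_updL_idx (d : PySem.Dict Int Node) (p : Int) (f : Node → Node) (i : Int) :
    getI (updL d (.idx p) f) i = if i = p then f (getI d p) else getI d i := by
  unfold updL getI
  exact PySem.Dict.getD_modify d p i dummyNode f

theorem getD_foldl_insert_range (g : Int → Node) (d0 : PySem.Dict Int Node) :
    ∀ (a b j : Int),
    PySem.Dict.getD ((PySem.List.pyRange a b 1).foldl (fun d i => d.insert i (g i)) d0) j dummyNode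
      = if a ≤ j ∧ j < b then g j else PySem.Dict.getD d0 j dummyNode := by
  intro a b j
  generalize hm : (b - a).toNat = m
  induction m generalizing b with
  | zero =>
    rw [PySem.List.pyRange_one_eq_nil (by omega)]
    simp only [List.foldl]
    rw [if_neg (by omega)]
  | succ m ih =>
    have hsp := PySem.List.pyRange_one_succ_right (a := a) (b := b - 1) (by omega)
    rw [show b - 1 + 1 = b by omega] at hsp
    rw [hsp, List.foldl_append]
    simp only [List.foldl]
    rw [PySem.Dict.getD_insert]
    by_cases hj : j = b - 1
    · subst hj; rw [if_pos rfl, if_pos (by omega)]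
    · rw [if_neg hj, ih (b := b - 1) (by omega)]
      by_cases h2 : a ≤ j ∧ j < b - 1
      · rw [if_pos h2, if_pos (by omega)]
      · rw [if_neg h2, if_neg (by omega)]

theorem getI_initA {n i : Int} (h0 : 0 ≤ i) (hn : i < n) :
    getI (initA n) i =
      (if i = 0 then ⟨i, .head, .idx (i + 1)⟩
       else if i = n - 1 then ⟨i, .idx (i - 1), .tail⟩
       else ⟨i, .idx (i - 1), .idx (i + 1)⟩ : Node) := by
  unfold initA getI
  rw [getD_foldl_insert_range (fun i =>
      if i = 0 then ⟨i, .head, .idx (i + 1)⟩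
      else if i = n - 1 then ⟨i, .idx (i - 1), .tail⟩
      else ⟨i, .idx (i - 1), .idx (i + 1)⟩ : Int → Node) PySem.Dict.empty 0 n i]
  rw [if_pos ⟨h0, hn⟩]

-- ---------- bridges between Pre_'s stack view and B's mark list ----------

theorem preNxt_eq_nxtB {n : Int} {stk : List Int} {res : List Char} {i : Int}
    (hlen : (res.length : Int) = n)
    (hag : ∀ j, i < j → j < n → (!stk.contains j) = aliveC res j) :
    preNxt n stk i = nxtB res i := by
  unfold preNxt nxtB
  rw [head?_filter, hlen]
  exact find?_congr' _ (fun x hx => by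
    rw [PySem.List.mem_pyRange_one] at hx
    exact hag x (by omega) (by omega))

theorem prePrv_eq_prvB {stk : List Int} {res : List Char} {i : Int}
    (hag : ∀ j, 0 ≤ j → j < i → (!stk.contains j) = aliveC res j) :
    prePrv stk i = prvB res i := by
  unfold prePrv prvB
  rw [head?_filter]
  exact find?_congr' _ (fun x hx => by
    rw [PySem.List.mem_pyRange_neg_one] at hx
    exact hag x (by omega) (by omega))

-- ---------- small facts about aliveC / scans ----------

theorem aliveC_lt_len {res : List Char} {c : Int} (hc0 : 0 ≤ c) (hal : aliveC res c = true) :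
    c < (res.length : Int) := by
  by_contra h
  rw [aliveC_nonneg_eq hc0] at hal
  rw [List.getD_eq_getElem?_getD, List.getElem?_eq_none (by omega)] at hal
  simp at hal

theorem nxt_congr {res res' : List Char} {i : Int} (hlen : res'.length = res.length)
    (h : ∀ t, i < t → t < (res.length : Int) → aliveC res' t = aliveC res t) :
    nxtB res' i = nxtB res i := by
  unfold nxtB
  rw [hlen]
  exact find?_congr' _ (fun x hx => by
    rw [PySem.List.mem_pyRange_one] at hx
    exact h x (by omega) (by omega))

theorem prv_congr {res res' : List Char} {i : Int}
    (h : ∀ t, 0 ≤ t → t < i → aliveC res' t = aliveC res t) :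
    prvB res' i = prvB res i := by
  unfold prvB
  exact find?_congr' _ (fun x hx => by
    rw [PySem.List.mem_pyRange_neg_one] at hx
    exact h x (by omega) (by omega))

theorem prv_of_nxt {res : List Char} {c j : Int} (hc0 : 0 ≤ c)
    (hal : aliveC res c = true) (h : nxtB res c = some j) : prvB res j = some c := by
  rw [nxtB_some] at h
  rw [prvB_some]
  exact ⟨hc0, h.1, hal, fun t ht1 ht2 => h.2.2.2 t ht1 ht2⟩

theorem nxt_of_prv {res : List Char} {c j : Int} (hcl : c < (res.length : Int))
    (hal : aliveC res c = true) (h : prvB res c = some j) : nxtB res j = some c := by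
  rw [prvB_some] at h
  rw [nxtB_some]
  exact ⟨h.2.1, hcl, hal, fun t ht1 ht2 => h.2.2.2 t ht1 ht2⟩

theorem set_restore {res : List Char} {c : Int} (hc0 : 0 ≤ c) (hal : aliveC res c = true) :
    PySem.List.pySetD (PySem.List.pySetD res c 'X') c 'O' = res := by
  have hcl : c < (res.length : Int) := aliveC_lt_len hc0 hal
  rw [PySem.List.pySetD_of_nonneg res 'X' hc0,
      PySem.List.pySetD_of_nonneg _ 'O' hc0, List.set_set 'X']
  have hlt : c.toNat < res.length := by omega
  have hv : res[c.toNat] = 'O' := by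
    rw [aliveC_nonneg_eq hc0, List.getD_eq_getElem res 'X' hlt] at hal
    simpa using hal
  rw [← hv]
  exact List.set_getElem_self hlt

-- dead-on-stack + all-dead-are-stacked gives the pointwise bridge between
-- Pre_'s "not deleted" test and B's mark test
theorem agree_of {n : Int} {res : List Char} {stk : List Int}
    (hdead : ∀ i ∈ stk, aliveC res i = false)
    (hsurj : ∀ i : Int, 0 ≤ i → i < n → aliveC res i = false → i ∈ stk) :
    ∀ j : Int, 0 ≤ j → j < n → (!stk.contains j) = aliveC res j := by
  intro j hj0 hjn
  by_cases hm : j ∈ stk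
  · simp [hm, hdead j hm]
  · cases hal : aliveC res j
    · exact absurd (hsurj j hj0 hjn hal) hm
    · simp [hm]

-- ---------- the move loops ----------

theorem moveD_sound {n : Int} {res : List Char} {d : PySem.Dict Int Node} {stk : List Int}
    (hlen : (res.length : Int) = n)
    (halive : AliveInv n res d)
    (hag : ∀ j : Int, 0 ≤ j → j < n → (!stk.contains j) = aliveC res j) :
    ∀ (m : Nat) (c c' : Int), preMove n stk true m c = some c' →
      ((fun cu => (getL d (getI d cu).next).data)^[m] c = c' ∧
       (fun cu => (nxtB res cu).getD cu)^[m] c = c') := by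
  intro m
  induction m with
  | zero => intro c c' h; simp only [preMove] at h; cases h; simp
  | succ m ih =>
    intro c c' h
    simp only [preMove] at h
    split at h
    case isFalse => cases h
    case isTrue hcond =>
      obtain ⟨hc0, hcn, hcs⟩ := hcond
      have halc : aliveC res c = true := by
        rw [← hag c hc0 hcn]; simpa using hcs
      rw [if_pos trivial] at h
      rw [preNxt_eq_nxtB hlen (fun j h1 h2 => hag j (by omega) h2)] at h
      cases hq : nxtB res c with
      | none => rw [hq] at h; cases h
      | some q =>
        rw [hq] at h
        have hqc := nxtB_some.mp hq
        have hstep : (getL d (getI d c).next).data = q := by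
          rw [halive c hc0 hcn halc]
          show (getL d (canonNext res c)).data = q
          rw [show canonNext res c = .idx q by unfold canonNext; rw [hq]]
          show (getI d q).data = q
          rw [halive q (by omega) (by omega) hqc.2.2.1]
          rfl
        rw [Function.iterate_succ_apply, Function.iterate_succ_apply]
        constructor
        · rw [hstep]; exact (ih q c' h).1
        · rw [show (nxtB res c).getD c = q by rw [hq]; rfl]; exact (ih q c' h).2

theorem moveU_sound {n : Int} {res : List Char} {d : PySem.Dict Int Node} {stk : List Int}
    (halive : AliveInv n res d)
    (hag : ∀ j : Int, 0 ≤ j → j < n → (!stk.contains j) = aliveC res j) :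
    ∀ (m : Nat) (c c' : Int), preMove n stk false m c = some c' →
      ((fun cu => (getL d (getI d cu).prev).data)^[m] c = c' ∧
       (fun cu => (prvB res cu).getD cu)^[m] c = c') := by
  intro m
  induction m with
  | zero => intro c c' h; simp only [preMove] at h; cases h; simp
  | succ m ih =>
    intro c c' h
    simp only [preMove] at h
    split at h
    case isFalse => cases h
    case isTrue hcond =>
      obtain ⟨hc0, hcn, hcs⟩ := hcond
      have halc : aliveC res c = true := by
        rw [← hag c hc0 hcn]; simpa using hcs
      rw [if_neg Bool.false_ne_true] at h
      rw [prePrv_eq_prvB (i := c) (fun j h1 h2 => hag j h1 (by omega))] at h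
      cases hq : prvB res c with
      | none => rw [hq] at h; cases h
      | some q =>
        rw [hq] at h
        have hqc := prvB_some.mp hq
        have hstep : (getL d (getI d c).prev).data = q := by
          rw [halive c hc0 hcn halc]
          show (getL d (canonPrev res c)).data = q
          rw [show canonPrev res c = .idx q by unfold canonPrev; rw [hq]]
          show (getI d q).data = q
          rw [halive q hqc.1 (by omega) hqc.2.2.1]
          rfl
        rw [Function.iterate_succ_apply, Function.iterate_succ_apply]
        constructor
        · rw [hstep]; exact (ih q c' h).1
        · rw [show (prvB res c).getD c = q by rw [hq]; rfl]; exact (ih q c' h).2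

-- ---------- effect of one mark flip on the scans ----------

theorem aliveC_kill {res : List Char} {cur t : Int} (hc0 : 0 ≤ cur)
    (hcl : cur < (res.length : Int)) (ht : 0 ≤ t) :
    aliveC (PySem.List.pySetD res cur 'X') t = if t = cur then false else aliveC res t := by
  rw [aliveC_set 'X' hc0 hcl ht]; simp

theorem aliveC_revive {res : List Char} {cur t : Int} (hc0 : 0 ≤ cur)
    (hcl : cur < (res.length : Int)) (ht : 0 ≤ t) :
    aliveC (PySem.List.pySetD res cur 'O') t = if t = cur then true else aliveC res t := by
  rw [aliveC_set 'O' hc0 hcl ht]; simp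

theorem canon_set_self {res : List Char} {c : Int} (v : Char) (hc0 : 0 ≤ c)
    (hcl : c < (res.length : Int)) :
    canonNode (PySem.List.pySetD res c v) c = canonNode res c := by
  unfold canonNode canonPrev canonNext
  rw [show nxtB (PySem.List.pySetD res c v) c = nxtB res c from
        nxt_congr (by rw [PySem.List.length_pySetD])
          (fun t ht1 ht2 => by rw [aliveC_set v hc0 hcl (by omega), if_neg (by omega)]),
      show prvB (PySem.List.pySetD res c v) c = prvB res c from
        prv_congr (fun t ht1 ht2 => by rw [aliveC_set v hc0 hcl ht1, if_neg (by omega)])]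

theorem nxt_le_barrier {res : List Char} {p i : Int} (hp0 : 0 ≤ p)
    (halp : aliveC res p = true) (hip : i < p) :
    ∃ j, nxtB res i = some j ∧ j ≤ p := by
  have hpl := aliveC_lt_len hp0 halp
  cases hj : nxtB res i with
  | none => exact absurd (nxtB_none.mp hj p hip hpl) (by simp [halp])
  | some j =>
    refine ⟨j, rfl, ?_⟩
    have hc := nxtB_some.mp hj
    by_contra hgt
    exact absurd (hc.2.2.2 p hip (by omega)) (by simp [halp])

theorem prv_ge_barrier {res : List Char} {q i : Int} (hq0 : 0 ≤ q)
    (halq : aliveC res q = true) (hqi : q < i) :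
    ∃ j, prvB res i = some j ∧ q ≤ j := by
  cases hj : prvB res i with
  | none => exact absurd (prvB_none.mp hj q hq0 hqi) (by simp [halq])
  | some j =>
    refine ⟨j, rfl, ?_⟩
    have hc := prvB_some.mp hj
    by_contra hgt
    exact absurd (hc.2.2.2 q (by omega) hqi) (by simp [halq])

-- canonical node of a surviving row is unchanged when row cur is deleted,
-- provided its two scans never ended at cur
theorem canon_kill_other {res : List Char} {cur i : Int} (hc0 : 0 ≤ cur)
    (hcl : cur < (res.length : Int)) (hi0 : 0 ≤ i)
    (hnext : nxtB res i ≠ some cur) (hprev : prvB res i ≠ some cur) :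
    canonNode (PySem.List.pySetD res cur 'X') i = canonNode res i := by
  have hlen1 : (PySem.List.pySetD res cur 'X').length = res.length := PySem.List.length_pySetD _ _ _
  unfold canonNode canonPrev canonNext
  have hnx : nxtB (PySem.List.pySetD res cur 'X') i = nxtB res i := by
    cases hj : nxtB res i with
    | none =>
      rw [nxtB_none]
      intro t ht1 ht2
      rw [hlen1] at ht2
      rw [aliveC_kill hc0 hcl (by omega)]
      split
      · rfl
      · exact nxtB_none.mp hj t ht1 ht2
    | some j =>
      have hc := nxtB_some.mp hj
      have hjc : j ≠ cur := fun h => hnext (by rw [hj, h])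
      rw [nxtB_some]
      refine ⟨hc.1, by omega, ?_, ?_⟩
      · rw [aliveC_kill hc0 hcl (by omega), if_neg hjc]; exact hc.2.2.1
      · intro t ht1 ht2
        rw [aliveC_kill hc0 hcl (by omega)]
        split
        · rfl
        · exact hc.2.2.2 t ht1 ht2
  have hpv : prvB (PySem.List.pySetD res cur 'X') i = prvB res i := by
    cases hj : prvB res i with
    | none =>
      rw [prvB_none]
      intro t ht1 ht2
      rw [aliveC_kill hc0 hcl ht1]
      split
      · rfl
      · exact prvB_none.mp hj t ht1 ht2
    | some j =>
      have hc := prvB_some.mp hj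
      have hjc : j ≠ cur := fun h => hprev (by rw [hj, h])
      rw [prvB_some]
      refine ⟨hc.1, hc.2.1, ?_, ?_⟩
      · rw [aliveC_kill hc0 hcl hc.1, if_neg hjc]; exact hc.2.2.1
      · intro t ht1 ht2
        rw [aliveC_kill hc0 hcl (by omega)]
        split
        · rfl
        · exact hc.2.2.2 t ht1 ht2
  rw [hnx, hpv]

-- canonical node of an alive row is unchanged when row cur0 is revived,
-- provided an alive barrier separates it from cur0 on the relevant side
theorem canon_revive_other {res : List Char} {cur0 i : Int} (hc0 : 0 ≤ cur0)
    (hcl : cur0 < (res.length : Int)) (hi0 : 0 ≤ i) (hne : i ≠ cur0)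
    (hA : i < cur0 → ∃ j, nxtB res i = some j ∧ j < cur0)
    (hB : cur0 < i → ∃ j, prvB res i = some j ∧ cur0 < j) :
    canonNode (PySem.List.pySetD res cur0 'O') i = canonNode res i := by
  have hlen1 : (PySem.List.pySetD res cur0 'O').length = res.length := PySem.List.length_pySetD _ _ _
  unfold canonNode canonPrev canonNext
  have hnx : nxtB (PySem.List.pySetD res cur0 'O') i = nxtB res i := by
    rcases lt_or_gt_of_ne hne with hlt | hgt
    · obtain ⟨j, hj, hjlt⟩ := hA hlt
      have hc := nxtB_some.mp hj
      rw [hj, nxtB_some]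
      refine ⟨hc.1, by omega, ?_, ?_⟩
      · rw [aliveC_revive hc0 hcl (by omega), if_neg (by omega)]; exact hc.2.2.1
      · intro t ht1 ht2
        rw [aliveC_revive hc0 hcl (by omega), if_neg (by omega)]
        exact hc.2.2.2 t ht1 ht2
    · apply nxt_congr hlen1
      intro t ht1 ht2
      rw [aliveC_revive hc0 hcl (by omega), if_neg (by omega)]
  have hpv : prvB (PySem.List.pySetD res cur0 'O') i = prvB res i := by
    rcases lt_or_gt_of_ne hne with hlt | hgt
    · apply prv_congr
      intro t ht1 ht2
      rw [aliveC_revive hc0 hcl ht1, if_neg (by omega)]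
    · obtain ⟨j, hj, hjgt⟩ := hB hgt
      have hc := prvB_some.mp hj
      rw [hj, prvB_some]
      refine ⟨hc.1, hc.2.1, ?_, ?_⟩
      · rw [aliveC_revive hc0 hcl hc.1, if_neg (by omega)]; exact hc.2.2.1
      · intro t ht1 ht2
        rw [aliveC_revive hc0 hcl (by omega), if_neg (by omega)]
        exact hc.2.2.2 t ht1 ht2
  rw [hnx, hpv]

-- ---------- 'C' on a middle row ----------

theorem C_mid {n : Int} {res : List Char} {d : PySem.Dict Int Node}
    {stkR : List Int} {ndsR : List Node} {cur p q : Int}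
    (hlen : (res.length : Int) = n)
    (halive : AliveInv n res d)
    (hdead : DeadInv n res d stkR ndsR)
    (hsurj : SurjInv n res stkR)
    (hc0 : 0 ≤ cur) (hcn : cur < n)
    (hal : aliveC res cur = true)
    (hq : nxtB res cur = some q) (hp : prvB res cur = some p) :
    AliveInv n (PySem.List.pySetD res cur 'X')
        (updL (updL d (.idx q) (fun nd => { nd with prev := .idx p })) (.idx p)
          (fun nd => { nd with next := .idx q })) ∧
    DeadInv n (PySem.List.pySetD res cur 'X')
        (updL (updL d (.idx q) (fun nd => { nd with prev := .idx p })) (.idx p)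
          (fun nd => { nd with next := .idx q })) (cur :: stkR) (canonNode res cur :: ndsR) ∧
    SurjInv n (PySem.List.pySetD res cur 'X') (cur :: stkR) := by
  have hcl : cur < (res.length : Int) := aliveC_lt_len hc0 hal
  have hqc := nxtB_some.mp hq
  have hpc := prvB_some.mp hp
  have hpq : p ≠ q := by omega
  have hcp : cur ≠ p := by omega
  have hcq : cur ≠ q := by omega
  have hlen1 : ((PySem.List.pySetD res cur 'X').length : Int) = (res.length : Int) := by
    rw [PySem.List.length_pySetD]
  refine ⟨?_, ?_, ?_⟩
  · -- AliveInv
    intro i hi0 hin hal1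
    have hine : i ≠ cur := by
      intro h; subst h
      rw [aliveC_kill hc0 hcl hi0, if_pos rfl] at hal1; cases hal1
    have halres : aliveC res i = true := by
      rwa [aliveC_kill hc0 hcl hi0, if_neg hine] at hal1
    simp only [getI_updL_idx]
    by_cases hip : i = p
    · subst hip
      rw [if_pos rfl, if_neg hpq, halive i hpc.1 (by omega) hpc.2.2.1]
      have h1 : canonPrev (PySem.List.pySetD res cur 'X') i = canonPrev res i := by
        unfold canonPrev
        rw [show prvB (PySem.List.pySetD res cur 'X') i = prvB res i from
          prv_congr (fun t ht1 ht2 => by rw [aliveC_kill hc0 hcl ht1, if_neg (by omega)])]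
      have h2 : canonNext (PySem.List.pySetD res cur 'X') i = .idx q := by
        unfold canonNext
        rw [show nxtB (PySem.List.pySetD res cur 'X') i = some q from nxtB_some.mpr
          ⟨by omega, by omega, by rw [aliveC_kill hc0 hcl (by omega), if_neg hcq.symm]; exact hqc.2.2.1,
           fun t ht1 ht2 => by
            rw [aliveC_kill hc0 hcl (by omega)]
            split
            · rfl
            · rcases lt_trichotomy t cur with h | h | h
              · exact hpc.2.2.2 t ht1 h
              · omega
              · exact hqc.2.2.2 t h ht2⟩]
      show (⟨i, canonPrev res i, Link.idx q⟩ : Node) = canonNode (PySem.List.pySetD res cur 'X') i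
      unfold canonNode
      rw [h1, h2]
    · by_cases hiq : i = q
      · subst hiq
        rw [if_neg hip, if_pos rfl, halive i (by omega) (by omega) hqc.2.2.1]
        have h1 : canonPrev (PySem.List.pySetD res cur 'X') i = .idx p := by
          unfold canonPrev
          rw [show prvB (PySem.List.pySetD res cur 'X') i = some p from prvB_some.mpr
            ⟨hpc.1, by omega, by rw [aliveC_kill hc0 hcl hpc.1, if_neg hcp.symm]; exact hpc.2.2.1,
             fun t ht1 ht2 => by
              rw [aliveC_kill hc0 hcl (by omega)]
              split
              · rfl
              · rcases lt_trichotomy t cur with h | h | h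
                · exact hpc.2.2.2 t ht1 h
                · omega
                · exact hqc.2.2.2 t h ht2⟩]
        have h2 : canonNext (PySem.List.pySetD res cur 'X') i = canonNext res i := by
          unfold canonNext
          rw [show nxtB (PySem.List.pySetD res cur 'X') i = nxtB res i from
            nxt_congr (by rw [PySem.List.length_pySetD])
              (fun t ht1 ht2 => by rw [aliveC_kill hc0 hcl (by omega), if_neg (by omega)])]
        show (⟨i, Link.idx p, canonNext res i⟩ : Node) = canonNode (PySem.List.pySetD res cur 'X') i
        unfold canonNode
        rw [h1, h2]
      · rw [if_neg hip, if_neg hiq, halive i hi0 hin halres,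
          canon_kill_other hc0 hcl hi0
            (fun h => hip (by
              have := prv_of_nxt hi0 halres h
              rw [hp] at this
              exact (Option.some.inj this).symm))
            (fun h => hiq (by
              have := nxt_of_prv (aliveC_lt_len hi0 halres) halres h
              rw [hq] at this
              exact (Option.some.inj this).symm))]
  · -- DeadInv
    refine ⟨ndsR, by rw [canon_set_self 'X' hc0 hcl], hc0, hcn, ?_, ?_, ?_⟩
    · rw [aliveC_kill hc0 hcl hc0, if_pos rfl]
    · simp only [getI_updL_idx]
      rw [if_neg hcp, if_neg hcq, halive cur hc0 hcn hal, canon_set_self 'X' hc0 hcl]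
    · rw [set_restore hc0 hal]
      refine DeadInv_congr hdead (fun i hi => ?_)
      have hid : aliveC res i = false := DeadInv_dead hlen hdead i hi
      simp only [getI_updL_idx]
      rw [if_neg (fun h => by rw [h] at hid; rw [hid] at hpc; simp at hpc),
          if_neg (fun h => by rw [h] at hid; rw [hid] at hqc; simp at hqc)]
  · -- SurjInv
    intro i hi0 hin hd1
    rw [aliveC_kill hc0 hcl hi0] at hd1
    by_cases hic : i = cur
    · simp [hic]
    · rw [if_neg hic] at hd1
      exact List.mem_cons_of_mem _ (hsurj i hi0 hin hd1)

-- ---------- 'C' on the first remaining row ----------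

theorem C_first {n : Int} {res : List Char} {d : PySem.Dict Int Node}
    {stkR : List Int} {ndsR : List Node} {cur q : Int}
    (hlen : (res.length : Int) = n)
    (halive : AliveInv n res d)
    (hdead : DeadInv n res d stkR ndsR)
    (hsurj : SurjInv n res stkR)
    (hc0 : 0 ≤ cur) (hcn : cur < n)
    (hal : aliveC res cur = true)
    (hq : nxtB res cur = some q) (hp : prvB res cur = none) :
    AliveInv n (PySem.List.pySetD res cur 'X')
        (updL d (.idx q) (fun nd => { nd with prev := .head })) ∧
    DeadInv n (PySem.List.pySetD res cur 'X')
        (updL d (.idx q) (fun nd => { nd with prev := .head })) (cur :: stkR) (canonNode res cur :: ndsR) ∧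
    SurjInv n (PySem.List.pySetD res cur 'X') (cur :: stkR) := by
  have hcl : cur < (res.length : Int) := aliveC_lt_len hc0 hal
  have hqc := nxtB_some.mp hq
  have hcq : cur ≠ q := by omega
  refine ⟨?_, ?_, ?_⟩
  · intro i hi0 hin hal1
    have hine : i ≠ cur := by
      intro h; subst h
      rw [aliveC_kill hc0 hcl hi0, if_pos rfl] at hal1; cases hal1
    have halres : aliveC res i = true := by
      rwa [aliveC_kill hc0 hcl hi0, if_neg hine] at hal1
    simp only [getI_updL_idx]
    by_cases hiq : i = q
    · subst hiq
      rw [if_pos rfl, halive i (by omega) (by omega) hqc.2.2.1]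
      have h1 : canonPrev (PySem.List.pySetD res cur 'X') i = .head := by
        unfold canonPrev
        rw [show prvB (PySem.List.pySetD res cur 'X') i = none from prvB_none.mpr
          (fun t ht1 ht2 => by
            rw [aliveC_kill hc0 hcl ht1]
            split
            · rfl
            · rcases lt_trichotomy t cur with h | h | h
              · exact prvB_none.mp hp t ht1 h
              · omega
              · exact hqc.2.2.2 t h ht2)]
      have h2 : canonNext (PySem.List.pySetD res cur 'X') i = canonNext res i := by
        unfold canonNext
        rw [show nxtB (PySem.List.pySetD res cur 'X') i = nxtB res i from
          nxt_congr (by rw [PySem.List.length_pySetD])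
            (fun t ht1 ht2 => by rw [aliveC_kill hc0 hcl (by omega), if_neg (by omega)])]
      show (⟨i, Link.head, canonNext res i⟩ : Node) = canonNode (PySem.List.pySetD res cur 'X') i
      unfold canonNode
      rw [h1, h2]
    · rw [if_neg hiq, halive i hi0 hin halres,
        canon_kill_other hc0 hcl hi0
          (fun h => by
            have := prv_of_nxt hi0 halres h
            rw [hp] at this
            cases this)
          (fun h => hiq (by
            have := nxt_of_prv (aliveC_lt_len hi0 halres) halres h
            rw [hq] at this
            exact (Option.some.inj this).symm))]
  · refine ⟨ndsR, by rw [canon_set_self 'X' hc0 hcl], hc0, hcn, ?_, ?_, ?_⟩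
    · rw [aliveC_kill hc0 hcl hc0, if_pos rfl]
    · simp only [getI_updL_idx]
      rw [if_neg hcq, halive cur hc0 hcn hal, canon_set_self 'X' hc0 hcl]
    · rw [set_restore hc0 hal]
      refine DeadInv_congr hdead (fun i hi => ?_)
      have hid : aliveC res i = false := DeadInv_dead hlen hdead i hi
      simp only [getI_updL_idx]
      rw [if_neg (fun h => by rw [h] at hid; rw [hid] at hqc; simp at hqc)]
  · intro i hi0 hin hd1
    rw [aliveC_kill hc0 hcl hi0] at hd1
    by_cases hic : i = cur
    · simp [hic]
    · rw [if_neg hic] at hd1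
      exact List.mem_cons_of_mem _ (hsurj i hi0 hin hd1)

-- ---------- 'C' on the last remaining row ----------

theorem C_last {n : Int} {res : List Char} {d : PySem.Dict Int Node}
    {stkR : List Int} {ndsR : List Node} {cur p : Int}
    (hlen : (res.length : Int) = n)
    (halive : AliveInv n res d)
    (hdead : DeadInv n res d stkR ndsR)
    (hsurj : SurjInv n res stkR)
    (hc0 : 0 ≤ cur) (hcn : cur < n)
    (hal : aliveC res cur = true)
    (hq : nxtB res cur = none) (hp : prvB res cur = some p) :
    AliveInv n (PySem.List.pySetD res cur 'X')
        (updL d (.idx p) (fun nd => { nd with next := .tail })) ∧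
    DeadInv n (PySem.List.pySetD res cur 'X')
        (updL d (.idx p) (fun nd => { nd with next := .tail })) (cur :: stkR) (canonNode res cur :: ndsR) ∧
    SurjInv n (PySem.List.pySetD res cur 'X') (cur :: stkR) := by
  have hcl : cur < (res.length : Int) := aliveC_lt_len hc0 hal
  have hpc := prvB_some.mp hp
  have hcp : cur ≠ p := by omega
  refine ⟨?_, ?_, ?_⟩
  · intro i hi0 hin hal1
    have hine : i ≠ cur := by
      intro h; subst h
      rw [aliveC_kill hc0 hcl hi0, if_pos rfl] at hal1; cases hal1
    have halres : aliveC res i = true := by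
      rwa [aliveC_kill hc0 hcl hi0, if_neg hine] at hal1
    simp only [getI_updL_idx]
    by_cases hip : i = p
    · subst hip
      rw [if_pos rfl, halive i hpc.1 (by omega) hpc.2.2.1]
      have h1 : canonPrev (PySem.List.pySetD res cur 'X') i = canonPrev res i := by
        unfold canonPrev
        rw [show prvB (PySem.List.pySetD res cur 'X') i = prvB res i from
          prv_congr (fun t ht1 ht2 => by rw [aliveC_kill hc0 hcl ht1, if_neg (by omega)])]
      have h2 : canonNext (PySem.List.pySetD res cur 'X') i = .tail := by
        unfold canonNext
        rw [show nxtB (PySem.List.pySetD res cur 'X') i = none from nxtB_none.mpr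
          (fun t ht1 ht2 => by
            rw [PySem.List.length_pySetD] at ht2
            rw [aliveC_kill hc0 hcl (by omega)]
            split
            · rfl
            · rcases lt_trichotomy t cur with h | h | h
              · exact hpc.2.2.2 t ht1 h
              · omega
              · exact nxtB_none.mp hq t h ht2)]
      show (⟨i, canonPrev res i, Link.tail⟩ : Node) = canonNode (PySem.List.pySetD res cur 'X') i
      unfold canonNode
      rw [h1, h2]
    · rw [if_neg hip, halive i hi0 hin halres,
        canon_kill_other hc0 hcl hi0
          (fun h => hip (by
            have := prv_of_nxt hi0 halres h
            rw [hp] at this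
            exact (Option.some.inj this).symm))
          (fun h => by
            have := nxt_of_prv (aliveC_lt_len hi0 halres) halres h
            rw [hq] at this
            cases this)]
  · refine ⟨ndsR, by rw [canon_set_self 'X' hc0 hcl], hc0, hcn, ?_, ?_, ?_⟩
    · rw [aliveC_kill hc0 hcl hc0, if_pos rfl]
    · simp only [getI_updL_idx]
      rw [if_neg hcp, halive cur hc0 hcn hal, canon_set_self 'X' hc0 hcl]
    · rw [set_restore hc0 hal]
      refine DeadInv_congr hdead (fun i hi => ?_)
      have hid : aliveC res i = false := DeadInv_dead hlen hdead i hi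
      simp only [getI_updL_idx]
      rw [if_neg (fun h => by rw [h] at hid; rw [hid] at hpc; simp at hpc)]
  · intro i hi0 hin hd1
    rw [aliveC_kill hc0 hcl hi0] at hd1
    by_cases hic : i = cur
    · simp [hic]
    · rw [if_neg hic] at hd1
      exact List.mem_cons_of_mem _ (hsurj i hi0 hin hd1)

-- ---------- 'Z' reviving a middle row ----------

theorem Z_mid {n : Int} {res : List Char} {d : PySem.Dict Int Node}
    {stk' : List Int} {nds' : List Node} {cur0 p q : Int}
    (hlen : (res.length : Int) = n)
    (halive : AliveInv n res d)
    (hrec : DeadInv n (PySem.List.pySetD res cur0 'O') d stk' nds')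
    (hsurj : SurjInv n res (cur0 :: stk'))
    (hc0 : 0 ≤ cur0) (hcn : cur0 < n)
    (hdead0 : aliveC res cur0 = false)
    (hget : getI d cur0 = canonNode res cur0)
    (hq : nxtB res cur0 = some q) (hp : prvB res cur0 = some p) :
    AliveInv n (PySem.List.pySetD res cur0 'O')
        (updL (updL d (.idx p) (fun nd => { nd with next := .idx cur0 })) (.idx q)
          (fun nd => { nd with prev := .idx cur0 })) ∧
    DeadInv n (PySem.List.pySetD res cur0 'O')
        (updL (updL d (.idx p) (fun nd => { nd with next := .idx cur0 })) (.idx q)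
          (fun nd => { nd with prev := .idx cur0 })) stk' nds' ∧
    SurjInv n (PySem.List.pySetD res cur0 'O') stk' := by
  have hcl : cur0 < (res.length : Int) := by omega
  have hqc := nxtB_some.mp hq
  have hpc := prvB_some.mp hp
  have hpq : p ≠ q := by omega
  have hcp : cur0 ≠ p := by omega
  have hcq : cur0 ≠ q := by omega
  have hlen1 : ((PySem.List.pySetD res cur0 'O').length : Int) = (res.length : Int) := by
    rw [PySem.List.length_pySetD]
  refine ⟨?_, ?_, ?_⟩
  · intro i hi0 hin hal1
    simp only [getI_updL_idx]
    by_cases hic : i = cur0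
    · subst hic
      rw [if_neg hcq, if_neg hcp, hget]
      exact (canon_set_self 'O' hc0 hcl).symm
    · have halres : aliveC res i = true := by
        rwa [aliveC_revive hc0 hcl hi0, if_neg hic] at hal1
      by_cases hiq : i = q
      · subst hiq
        rw [if_pos rfl, if_neg (fun h => hpq h.symm), halive i (by omega) (by omega) hqc.2.2.1]
        have h1 : canonPrev (PySem.List.pySetD res cur0 'O') i = .idx cur0 := by
          unfold canonPrev
          rw [show prvB (PySem.List.pySetD res cur0 'O') i = some cur0 from prvB_some.mpr
            ⟨hc0, by omega, by rw [aliveC_revive hc0 hcl hc0, if_pos rfl],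
             fun t ht1 ht2 => by
              rw [aliveC_revive hc0 hcl (by omega), if_neg (by omega)]
              exact hqc.2.2.2 t ht1 ht2⟩]
        have h2 : canonNext (PySem.List.pySetD res cur0 'O') i = canonNext res i := by
          unfold canonNext
          rw [show nxtB (PySem.List.pySetD res cur0 'O') i = nxtB res i from
            nxt_congr (by rw [PySem.List.length_pySetD])
              (fun t ht1 ht2 => by rw [aliveC_revive hc0 hcl (by omega), if_neg (by omega)])]
        show (⟨i, Link.idx cur0, canonNext res i⟩ : Node) = canonNode (PySem.List.pySetD res cur0 'O') i
        unfold canonNode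
        rw [h1, h2]
      · by_cases hip : i = p
        · subst hip
          rw [if_neg hiq, if_pos rfl, halive i hpc.1 (by omega) hpc.2.2.1]
          have h1 : canonPrev (PySem.List.pySetD res cur0 'O') i = canonPrev res i := by
            unfold canonPrev
            rw [show prvB (PySem.List.pySetD res cur0 'O') i = prvB res i from
              prv_congr (fun t ht1 ht2 => by
                rw [aliveC_revive hc0 hcl ht1, if_neg (by omega)])]
          have h2 : canonNext (PySem.List.pySetD res cur0 'O') i = .idx cur0 := by
            unfold canonNext
            rw [show nxtB (PySem.List.pySetD res cur0 'O') i = some cur0 from nxtB_some.mpr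
              ⟨by omega, by omega, by rw [aliveC_revive hc0 hcl hc0, if_pos rfl],
               fun t ht1 ht2 => by
                rw [aliveC_revive hc0 hcl (by omega), if_neg (by omega)]
                exact hpc.2.2.2 t ht1 ht2⟩]
          show (⟨i, canonPrev res i, Link.idx cur0⟩ : Node) = canonNode (PySem.List.pySetD res cur0 'O') i
          unfold canonNode
          rw [h1, h2]
        · rw [if_neg hiq, if_neg hip, halive i hi0 hin halres,
            canon_revive_other hc0 hcl hi0 hic
              (fun hlt => by
                have hipp : i < p := by
                  rcases lt_trichotomy i p with h | h | h
                  · exact h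
                  · exact absurd h hip
                  · exact absurd halres (by rw [hpc.2.2.2 i h hlt]; simp)
                obtain ⟨j, hj, hjp⟩ := nxt_le_barrier hpc.1 hpc.2.2.1 hipp
                exact ⟨j, hj, by omega⟩)
              (fun hgt => by
                have hiqq : q < i := by
                  rcases lt_trichotomy q i with h | h | h
                  · exact h
                  · exact absurd h.symm hiq
                  · exact absurd halres (by rw [hqc.2.2.2 i hgt h]; simp)
                obtain ⟨j, hj, hjq⟩ := prv_ge_barrier (by omega) hqc.2.2.1 hiqq
                exact ⟨j, hj, by omega⟩)]
  · refine DeadInv_congr hrec (fun i hi => ?_)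
    have hid : aliveC (PySem.List.pySetD res cur0 'O') i = false :=
      DeadInv_dead (by rw [hlen1, hlen]) hrec i hi
    have hi0 : 0 ≤ i := (DeadInv_bounds hrec i hi).1
    have hidres : aliveC res i = false := by
      rw [aliveC_revive hc0 hcl hi0] at hid
      by_cases h : i = cur0
      · rw [if_pos h] at hid; cases hid
      · rwa [if_neg h] at hid
    simp only [getI_updL_idx]
    rw [if_neg (fun h => by rw [h] at hidres; rw [hidres] at hqc; simp at hqc),
        if_neg (fun h => by rw [h] at hidres; rw [hidres] at hpc; simp at hpc)]
  · intro i hi0 hin hd1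
    rw [aliveC_revive hc0 hcl hi0] at hd1
    by_cases hic : i = cur0
    · rw [if_pos hic] at hd1; cases hd1
    · rw [if_neg hic] at hd1
      have := hsurj i hi0 hin hd1
      rcases List.mem_cons.mp this with h | h
      · exact absurd h hic
      · exact h

-- ---------- 'Z' reviving the first row ----------

theorem Z_first {n : Int} {res : List Char} {d : PySem.Dict Int Node}
    {stk' : List Int} {nds' : List Node} {cur0 q : Int}
    (hlen : (res.length : Int) = n)
    (halive : AliveInv n res d)
    (hrec : DeadInv n (PySem.List.pySetD res cur0 'O') d stk' nds')
    (hsurj : SurjInv n res (cur0 :: stk'))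
    (hc0 : 0 ≤ cur0) (hcn : cur0 < n)
    (hdead0 : aliveC res cur0 = false)
    (hget : getI d cur0 = canonNode res cur0)
    (hq : nxtB res cur0 = some q) (hp : prvB res cur0 = none) :
    AliveInv n (PySem.List.pySetD res cur0 'O')
        (updL d (.idx q) (fun nd => { nd with prev := .idx cur0 })) ∧
    DeadInv n (PySem.List.pySetD res cur0 'O')
        (updL d (.idx q) (fun nd => { nd with prev := .idx cur0 })) stk' nds' ∧
    SurjInv n (PySem.List.pySetD res cur0 'O') stk' := by
  have hcl : cur0 < (res.length : Int) := by omega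
  have hqc := nxtB_some.mp hq
  have hcq : cur0 ≠ q := by omega
  have hlen1 : ((PySem.List.pySetD res cur0 'O').length : Int) = (res.length : Int) := by
    rw [PySem.List.length_pySetD]
  refine ⟨?_, ?_, ?_⟩
  · intro i hi0 hin hal1
    simp only [getI_updL_idx]
    by_cases hic : i = cur0
    · subst hic
      rw [if_neg hcq, hget]
      exact (canon_set_self 'O' hc0 hcl).symm
    · have halres : aliveC res i = true := by
        rwa [aliveC_revive hc0 hcl hi0, if_neg hic] at hal1
      by_cases hiq : i = q
      · subst hiq
        rw [if_pos rfl, halive i (by omega) (by omega) hqc.2.2.1]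
        have h1 : canonPrev (PySem.List.pySetD res cur0 'O') i = .idx cur0 := by
          unfold canonPrev
          rw [show prvB (PySem.List.pySetD res cur0 'O') i = some cur0 from prvB_some.mpr
            ⟨hc0, by omega, by rw [aliveC_revive hc0 hcl hc0, if_pos rfl],
             fun t ht1 ht2 => by
              rw [aliveC_revive hc0 hcl (by omega), if_neg (by omega)]
              exact hqc.2.2.2 t ht1 ht2⟩]
        have h2 : canonNext (PySem.List.pySetD res cur0 'O') i = canonNext res i := by
          unfold canonNext
          rw [show nxtB (PySem.List.pySetD res cur0 'O') i = nxtB res i from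
            nxt_congr (by rw [PySem.List.length_pySetD])
              (fun t ht1 ht2 => by rw [aliveC_revive hc0 hcl (by omega), if_neg (by omega)])]
        show (⟨i, Link.idx cur0, canonNext res i⟩ : Node) = canonNode (PySem.List.pySetD res cur0 'O') i
        unfold canonNode
        rw [h1, h2]
      · rw [if_neg hiq, halive i hi0 hin halres,
          canon_revive_other hc0 hcl hi0 hic
            (fun hlt => absurd halres (by rw [prvB_none.mp hp i hi0 hlt]; simp))
            (fun hgt => by
              have hiqq : q < i := by
                rcases lt_trichotomy q i with h | h | h
                · exact h
                · exact absurd h.symm hiq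
                · exact absurd halres (by rw [hqc.2.2.2 i hgt h]; simp)
              obtain ⟨j, hj, hjq⟩ := prv_ge_barrier (by omega) hqc.2.2.1 hiqq
              exact ⟨j, hj, by omega⟩)]
  · refine DeadInv_congr hrec (fun i hi => ?_)
    have hid : aliveC (PySem.List.pySetD res cur0 'O') i = false :=
      DeadInv_dead (by rw [hlen1, hlen]) hrec i hi
    have hi0 : 0 ≤ i := (DeadInv_bounds hrec i hi).1
    have hidres : aliveC res i = false := by
      rw [aliveC_revive hc0 hcl hi0] at hid
      by_cases h : i = cur0
      · rw [if_pos h] at hid; cases hid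
      · rwa [if_neg h] at hid
    simp only [getI_updL_idx]
    rw [if_neg (fun h => by rw [h] at hidres; rw [hidres] at hqc; simp at hqc)]
  · intro i hi0 hin hd1
    rw [aliveC_revive hc0 hcl hi0] at hd1
    by_cases hic : i = cur0
    · rw [if_pos hic] at hd1; cases hd1
    · rw [if_neg hic] at hd1
      have := hsurj i hi0 hin hd1
      rcases List.mem_cons.mp this with h | h
      · exact absurd h hic
      · exact h

-- ---------- 'Z' reviving the last row ----------

theorem Z_last {n : Int} {res : List Char} {d : PySem.Dict Int Node}
    {stk' : List Int} {nds' : List Node} {cur0 p : Int}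
    (hlen : (res.length : Int) = n)
    (halive : AliveInv n res d)
    (hrec : DeadInv n (PySem.List.pySetD res cur0 'O') d stk' nds')
    (hsurj : SurjInv n res (cur0 :: stk'))
    (hc0 : 0 ≤ cur0) (hcn : cur0 < n)
    (hdead0 : aliveC res cur0 = false)
    (hget : getI d cur0 = canonNode res cur0)
    (hq : nxtB res cur0 = none) (hp : prvB res cur0 = some p) :
    AliveInv n (PySem.List.pySetD res cur0 'O')
        (updL d (.idx p) (fun nd => { nd with next := .idx cur0 })) ∧
    DeadInv n (PySem.List.pySetD res cur0 'O')
        (updL d (.idx p) (fun nd => { nd with next := .idx cur0 })) stk' nds' ∧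
    SurjInv n (PySem.List.pySetD res cur0 'O') stk' := by
  have hcl : cur0 < (res.length : Int) := by omega
  have hpc := prvB_some.mp hp
  have hcp : cur0 ≠ p := by omega
  have hlen1 : ((PySem.List.pySetD res cur0 'O').length : Int) = (res.length : Int) := by
    rw [PySem.List.length_pySetD]
  refine ⟨?_, ?_, ?_⟩
  · intro i hi0 hin hal1
    simp only [getI_updL_idx]
    by_cases hic : i = cur0
    · subst hic
      rw [if_neg hcp, hget]
      exact (canon_set_self 'O' hc0 hcl).symm
    · have halres : aliveC res i = true := by
        rwa [aliveC_revive hc0 hcl hi0, if_neg hic] at hal1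
      by_cases hip : i = p
      · subst hip
        rw [if_pos rfl, halive i hpc.1 (by omega) hpc.2.2.1]
        have h1 : canonPrev (PySem.List.pySetD res cur0 'O') i = canonPrev res i := by
          unfold canonPrev
          rw [show prvB (PySem.List.pySetD res cur0 'O') i = prvB res i from
            prv_congr (fun t ht1 ht2 => by
              rw [aliveC_revive hc0 hcl ht1, if_neg (by omega)])]
        have h2 : canonNext (PySem.List.pySetD res cur0 'O') i = .idx cur0 := by
          unfold canonNext
          rw [show nxtB (PySem.List.pySetD res cur0 'O') i = some cur0 from nxtB_some.mpr
            ⟨by omega, by omega, by rw [aliveC_revive hc0 hcl hc0, if_pos rfl],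
             fun t ht1 ht2 => by
              rw [aliveC_revive hc0 hcl (by omega), if_neg (by omega)]
              exact hpc.2.2.2 t ht1 ht2⟩]
        show (⟨i, canonPrev res i, Link.idx cur0⟩ : Node) = canonNode (PySem.List.pySetD res cur0 'O') i
        unfold canonNode
        rw [h1, h2]
      · rw [if_neg hip, halive i hi0 hin halres,
          canon_revive_other hc0 hcl hi0 hic
            (fun hlt => by
              have hipp : i < p := by
                rcases lt_trichotomy i p with h | h | h
                · exact h
                · exact absurd h hip
                · exact absurd halres (by rw [hpc.2.2.2 i h hlt]; simp)
              obtain ⟨j, hj, hjp⟩ := nxt_le_barrier hpc.1 hpc.2.2.1 hipp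
              exact ⟨j, hj, by omega⟩)
            (fun hgt => absurd halres
              (by rw [nxtB_none.mp hq i hgt (aliveC_lt_len hi0 halres)]; simp))]
  · refine DeadInv_congr hrec (fun i hi => ?_)
    have hid : aliveC (PySem.List.pySetD res cur0 'O') i = false :=
      DeadInv_dead (by rw [hlen1, hlen]) hrec i hi
    have hi0 : 0 ≤ i := (DeadInv_bounds hrec i hi).1
    have hidres : aliveC res i = false := by
      rw [aliveC_revive hc0 hcl hi0] at hid
      by_cases h : i = cur0
      · rw [if_pos h] at hid; cases hid
      · rwa [if_neg h] at hid
    simp only [getI_updL_idx]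
    rw [if_neg (fun h => by rw [h] at hidres; rw [hidres] at hpc; simp at hpc)]
  · intro i hi0 hin hd1
    rw [aliveC_revive hc0 hcl hi0] at hd1
    by_cases hic : i = cur0
    · rw [if_pos hic] at hd1; cases hd1
    · rw [if_neg hic] at hd1
      have := hsurj i hi0 hin hd1
      rcases List.mem_cons.mp this with h | h
      · exact absurd h hic
      · exact h

-- ---------- one command preserves the coupling ----------

theorem stepPreserve {n : Int} {a : AState} {b : BState} {c : String} {p' : Int × List Int}
    (hI : CoupInv n a b)
    (hP : preStep n (some (b.curr, b.stack.reverse)) c = some p') :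
    CoupInv n (stepA a c) (stepB b c) ∧ p' = ((stepB b c).curr, (stepB b c).stack.reverse) := by
  obtain ⟨d, res, cur, stkA⟩ := a
  obtain ⟨resB, curB, stkB⟩ := b
  obtain ⟨hres, hcur, hlen, halive, hdead, hsurj⟩ := hI
  dsimp only at hres hcur hlen halive hdead hsurj hP ⊢
  subst hres hcur
  have hagree : ∀ j : Int, 0 ≤ j → j < n → (!(stkB.reverse).contains j) = aliveC res j :=
    agree_of (DeadInv_dead hlen hdead) hsurj
  unfold stepA stepB
  unfold preStep at hP
  dsimp only at hP ⊢
  by_cases hL : 3 ≤ PySem.Str.len c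
  · rw [if_pos hL, if_pos hL]
    rw [if_pos hL] at hP
    cases hsp : PySem.Str.split₀ c with
    | nil => rw [hsp] at hP; cases hP
    | cons t0 rest =>
      rw [hsp] at hP
      dsimp only at hP
      by_cases hD : t0 = "D"
      · subst hD
        rw [if_pos (Or.inl rfl)] at hP
        cases hr : rest.head? with
        | none => rw [hr] at hP; cases hP
        | some t1 =>
          rw [hr] at hP
          cases rest with
          | nil => cases hr
          | cons r rs =>
            have hrt : t1 = r := by symm; simpa using hr
            subst hrt
            dsimp only [List.headD, List.getD, List.head?, List.getElem?_cons_succ,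
              List.getElem?_cons_zero] at hP ⊢
            simp only [String.reduceEq, reduceIte, Option.getD_some]
            cases hx : PySem.Int.ofStr? t1 with
            | none => rw [hx] at hP; cases hP
            | some x =>
              rw [hx] at hP
              dsimp only
              simp only [show (("D" : String) == "D") = true from by simp] at hP
              cases hmv : preMove n stkB.reverse true x.toNat cur with
              | none => rw [hmv] at hP; cases hP
              | some c' =>
                rw [hmv] at hP
                obtain ⟨h1, h2⟩ := moveD_sound hlen halive hagree x.toNat cur c' hmv
                simp only [Option.map_some] at hP
                refine ⟨⟨rfl, ?_, hlen, halive, hdead, hsurj⟩, ?_⟩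
                · dsimp only
                  rw [foldl_const_iterate, foldl_const_iterate]
                  simp only [List.length_range, h1, h2]
                · cases hP
                  rw [foldl_const_iterate]
                  simp only [List.length_range, h2]
      · by_cases hU : t0 = "U"
        · subst hU
          rw [if_pos (Or.inr rfl)] at hP
          rw [if_neg (by simp)]
          cases hr : rest.head? with
          | none => rw [hr] at hP; cases hP
          | some t1 =>
            rw [hr] at hP
            cases rest with
            | nil => cases hr
            | cons r rs =>
              have hrt : t1 = r := by symm; simpa using hr
              subst hrt
              dsimp only [List.headD, List.getD, List.head?, List.getElem?_cons_succ,
                List.getElem?_cons_zero] at hP ⊢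
              simp only [String.reduceEq, reduceIte, Option.getD_some]
              cases hx : PySem.Int.ofStr? t1 with
              | none => rw [hx] at hP; cases hP
              | some x =>
                rw [hx] at hP
                dsimp only
                simp only [show (("U" : String) == "D") = false from by simp] at hP
                cases hmv : preMove n stkB.reverse false x.toNat cur with
                | none => rw [hmv] at hP; cases hP
                | some c' =>
                  rw [hmv] at hP
                  obtain ⟨h1, h2⟩ := moveU_sound halive hagree x.toNat cur c' hmv
                  simp only [Option.map_some] at hP
                  refine ⟨⟨rfl, ?_, hlen, halive, hdead, hsurj⟩, ?_⟩
                  · dsimp only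
                    rw [foldl_const_iterate, foldl_const_iterate]
                    simp only [List.length_range, h1, h2]
                  · cases hP
                    rw [foldl_const_iterate]
                    simp only [List.length_range, h2]
        · rw [if_neg (by simp [hD, hU])] at hP
          rw [if_neg (by simpa using hD), if_neg (by simpa using hU),
            if_neg (by simpa using hD), if_neg (by simpa using hU)]
          cases hP
          exact ⟨⟨rfl, rfl, hlen, halive, hdead, hsurj⟩, rfl⟩
  · rw [if_neg hL, if_neg hL]
    rw [if_neg hL] at hP
    by_cases hC : c = "C"
    · rw [if_pos hC] at hP
      rw [if_pos hC, if_pos hC]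
      by_cases hcond : 0 ≤ cur ∧ cur < n ∧ ¬ stkB.reverse.contains cur = true
      case neg => rw [if_neg hcond] at hP; cases hP
      case pos =>
        rw [if_pos hcond] at hP
        obtain ⟨hc0, hcn, hcs⟩ := hcond
        have hal : aliveC res cur = true := by
          rw [← hagree cur hc0 hcn]; simpa using hcs
        have hcl : cur < (res.length : Int) := aliveC_lt_len hc0 hal
        have hgcur : getI d cur = canonNode res cur := halive cur hc0 hcn hal
        have hnx1 : nxtB (PySem.List.pySetD res cur 'X') cur = nxtB res cur :=
          nxt_congr (by rw [PySem.List.length_pySetD])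
            (fun t ht1 ht2 => by rw [aliveC_kill hc0 hcl (by omega), if_neg (by omega)])
        have hpv1 : prvB (PySem.List.pySetD res cur 'X') cur = prvB res cur :=
          prv_congr (fun t ht1 ht2 => by rw [aliveC_kill hc0 hcl ht1, if_neg (by omega)])
        rw [preNxt_eq_nxtB hlen (fun j h1 h2 => hagree j (by omega) h2)] at hP
        rw [hgcur]
        have pd : (canonNode res cur).data = cur := rfl
        rw [pd]
        cases hqo : nxtB res cur with
        | some q =>
          have hqc := nxtB_some.mp hqo
          have hcq : cur ≠ q := by omega
          have pn : (canonNode res cur).next = Link.idx q := by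
            show canonNext res cur = Link.idx q
            unfold canonNext; rw [hqo]
          rw [hqo] at hP
          rw [pn, if_neg (by simp)]
          rw [hnx1, hqo]
          cases hpo : prvB res cur with
          | some p =>
            have hpc := prvB_some.mp hpo
            have hcp : cur ≠ p := by omega
            have pp : (canonNode res cur).prev = Link.idx p := by
              show canonPrev res cur = Link.idx p
              unfold canonPrev; rw [hpo]
            rw [pp, if_neg (by simp)]
            have e1 : getI (updL d (Link.idx q)
                (fun nd => { nd with prev := Link.idx p })) cur = canonNode res cur := by
              rw [getI_updL_idx, if_neg hcq]; exact hgcur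
            rw [e1, pp, pn]
            have e2 : getI (updL (updL d (Link.idx q)
                (fun nd => { nd with prev := Link.idx p })) (Link.idx p)
                (fun nd => { nd with next := Link.idx q })) cur = canonNode res cur := by
              simp only [getI_updL_idx]
              rw [if_neg hcp, if_neg hcq]; exact hgcur
            rw [e2, pn]
            dsimp only [getL]
            have e3 : (getI (updL (updL d (Link.idx q)
                (fun nd => { nd with prev := Link.idx p })) (Link.idx p)
                (fun nd => { nd with next := Link.idx q })) q).data = q := by
              simp only [getI_updL_idx]
              rw [if_neg (show q ≠ p by omega), if_pos trivial,
                halive q (by omega) (by omega) hqc.2.2.1]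
              rfl
            rw [e3]
            obtain ⟨hA, hD, hS⟩ := C_mid hlen halive hdead hsurj hc0 hcn hal hqo hpo
            cases hP
            refine ⟨⟨rfl, rfl, ?_, hA, ?_, ?_⟩, ?_⟩
            · dsimp only; rw [PySem.List.length_pySetD]; exact hlen
            · dsimp only; simpa using hD
            · dsimp only; simpa using hS
            · dsimp only; simp
          | none =>
            have hp0 := prvB_none.mp hpo
            have pp : (canonNode res cur).prev = Link.head := by
              show canonPrev res cur = Link.head
              unfold canonPrev; rw [hpo]
            rw [pp, if_pos rfl]
            have e1 : getI (updL d (Link.idx q)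
                (fun nd => { nd with prev := Link.head })) cur = canonNode res cur := by
              rw [getI_updL_idx, if_neg hcq]; exact hgcur
            rw [e1, pn]
            dsimp only [getL]
            have e3 : (getI (updL d (Link.idx q)
                (fun nd => { nd with prev := Link.head })) q).data = q := by
              rw [getI_updL_idx, if_pos rfl, halive q (by omega) (by omega) hqc.2.2.1]
              rfl
            rw [e3]
            obtain ⟨hA, hD, hS⟩ := C_first hlen halive hdead hsurj hc0 hcn hal hqo hpo
            cases hP
            refine ⟨⟨rfl, rfl, ?_, hA, ?_, ?_⟩, ?_⟩
            · dsimp only; rw [PySem.List.length_pySetD]; exact hlen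
            · dsimp only; simpa using hD
            · dsimp only; simpa using hS
            · dsimp only; simp
        | none =>
          have hq0 := nxtB_none.mp hqo
          have pn : (canonNode res cur).next = Link.tail := by
            show canonNext res cur = Link.tail
            unfold canonNext; rw [hqo]
          rw [hqo] at hP
          rw [prePrv_eq_prvB (i := cur) (fun j h1 h2 => hagree j h1 (by omega))] at hP
          rw [pn, if_pos rfl]
          rw [hnx1, hqo, hpv1]
          cases hpo : prvB res cur with
          | none => rw [hpo] at hP; cases hP
          | some p =>
            have hpc := prvB_some.mp hpo
            have hcp : cur ≠ p := by omega
            have pp : (canonNode res cur).prev = Link.idx p := by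
              show canonPrev res cur = Link.idx p
              unfold canonPrev; rw [hpo]
            rw [hpo] at hP
            rw [pp]
            have e1 : getI (updL d (Link.idx p)
                (fun nd => { nd with next := Link.tail })) cur = canonNode res cur := by
              rw [getI_updL_idx, if_neg hcp]; exact hgcur
            rw [e1, pp]
            dsimp only [getL]
            have e3 : (getI (updL d (Link.idx p)
                (fun nd => { nd with next := Link.tail })) p).data = p := by
              rw [getI_updL_idx, if_pos rfl, halive p hpc.1 (by omega) hpc.2.2.1]
              rfl
            rw [e3]
            obtain ⟨hA, hD, hS⟩ := C_last hlen halive hdead hsurj hc0 hcn hal hqo hpo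
            cases hP
            refine ⟨⟨rfl, rfl, ?_, hA, ?_, ?_⟩, ?_⟩
            · dsimp only; rw [PySem.List.length_pySetD]; exact hlen
            · dsimp only; simpa using hD
            · dsimp only; simpa using hS
            · dsimp only; simp
    · by_cases hZ : c = "Z"
      · rw [if_neg hC, if_pos hZ] at hP
        rw [if_neg hC, if_pos hZ, if_neg hC, if_pos hZ]
        cases hstk : stkB.reverse with
        | nil => rw [hstk] at hP; cases hP
        | cons cur0 stk' =>
          rw [hstk] at hP hdead hsurj hagree
          obtain ⟨nds', hndseq, hb0, hbn, hdead0, hget, hrec⟩ := hdead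
          have hstkA : stkA = nds'.reverse ++ [canonNode res cur0] := by
            have := congrArg List.reverse hndseq
            simpa using this
          have hstkB : stkB = stk'.reverse ++ [cur0] := by
            have := congrArg List.reverse hstk
            simpa using this
          rw [hstkA, hstkB, PySem.List.pop?_last, PySem.List.pop?_last]
          dsimp only
          have hcl0 : cur0 < (res.length : Int) := by omega
          have pd : (canonNode res cur0).data = cur0 := rfl
          rw [pd]
          cases hP
          cases hqo : nxtB res cur0 with
          | some q =>
            have hqc := nxtB_some.mp hqo
            have pn : (canonNode res cur0).next = Link.idx q := by
              show canonNext res cur0 = Link.idx q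
              unfold canonNext; rw [hqo]
            rw [pn, if_neg (by simp)]
            cases hpo : prvB res cur0 with
            | some p =>
              have hpc := prvB_some.mp hpo
              have pp : (canonNode res cur0).prev = Link.idx p := by
                show canonPrev res cur0 = Link.idx p
                unfold canonPrev; rw [hpo]
              rw [pp, if_neg (by simp)]
              obtain ⟨hA, hD, hS⟩ := Z_mid hlen halive hrec hsurj hb0 hbn hdead0 hget hqo hpo
              refine ⟨⟨rfl, rfl, ?_, hA, ?_, ?_⟩, ?_⟩
              · dsimp only; rw [PySem.List.length_pySetD]; exact hlen
              · dsimp only; simpa using hD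
              · dsimp only; simpa using hS
              · dsimp only; simp
            | none =>
              have pp : (canonNode res cur0).prev = Link.head := by
                show canonPrev res cur0 = Link.head
                unfold canonPrev; rw [hpo]
              rw [pp, if_pos rfl]
              obtain ⟨hA, hD, hS⟩ := Z_first hlen halive hrec hsurj hb0 hbn hdead0 hget hqo hpo
              refine ⟨⟨rfl, rfl, ?_, hA, ?_, ?_⟩, ?_⟩
              · dsimp only; rw [PySem.List.length_pySetD]; exact hlen
              · dsimp only; simpa using hD
              · dsimp only; simpa using hS
              · dsimp only; simp
          | none =>
            have pn : (canonNode res cur0).next = Link.tail := by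
              show canonNext res cur0 = Link.tail
              unfold canonNext; rw [hqo]
            rw [pn, if_pos rfl]
            cases hpo : prvB res cur0 with
            | some p =>
              have pp : (canonNode res cur0).prev = Link.idx p := by
                show canonPrev res cur0 = Link.idx p
                unfold canonPrev; rw [hpo]
              rw [pp]
              obtain ⟨hA, hD, hS⟩ := Z_last hlen halive hrec hsurj hb0 hbn hdead0 hget hqo hpo
              refine ⟨⟨rfl, rfl, ?_, hA, ?_, ?_⟩, ?_⟩
              · dsimp only; rw [PySem.List.length_pySetD]; exact hlen
              · dsimp only; simpa using hD
              · dsimp only; simpa using hS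
              · dsimp only; simp
            | none =>
              -- both pointers are sentinels: the Python A would raise KeyError here, and
              -- the port's updL leaves the dict unchanged, which is itself canonical
              have h1 : ∀ t, 0 ≤ t → t < (res.length : Int) → t ≠ cur0 → aliveC res t = false := by
                intro t ht0 htl htc
                rcases lt_trichotomy t cur0 with h | h | h
                · exact prvB_none.mp hpo t ht0 h
                · exact absurd h htc
                · exact nxtB_none.mp hqo t h htl
              have pp : (canonNode res cur0).prev = Link.head := by
                show canonPrev res cur0 = Link.head
                unfold canonPrev; rw [hpo]
              rw [pp]
              dsimp only [updL]
              have hAll : AliveInv n (PySem.List.pySetD res cur0 'O') d := by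
                intro i hi0 hin hal1
                by_cases hic : i = cur0
                · subst hic; rw [hget]; exact (canon_set_self 'O' hb0 hcl0).symm
                · have halres : aliveC res i = true := by
                    rwa [aliveC_revive hb0 hcl0 hi0, if_neg hic] at hal1
                  have hltt := aliveC_lt_len hi0 halres
                  exact absurd halres (by rw [h1 i hi0 hltt hic]; simp)
              refine ⟨⟨rfl, rfl, ?_, hAll, ?_, ?_⟩, ?_⟩
              · dsimp only; rw [PySem.List.length_pySetD]; exact hlen
              · dsimp only; simpa using hrec
              · dsimp only
                rw [List.reverse_reverse]
                intro i hi0 hin hd1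
                rw [aliveC_revive hb0 hcl0 hi0] at hd1
                by_cases hic : i = cur0
                · rw [if_pos hic] at hd1; cases hd1
                · rw [if_neg hic] at hd1
                  have := hsurj i hi0 hin hd1
                  rcases List.mem_cons.mp this with h | h
                  · exact absurd h hic
                  · exact h
              · dsimp only; simp
          
      · rw [if_neg hC, if_neg hZ] at hP
        rw [if_neg hC, if_neg hZ, if_neg hC, if_neg hZ]
        cases hP
        exact ⟨⟨rfl, rfl, hlen, halive, hdead, hsurj⟩, rfl⟩

-- ---------- the whole command list ----------

theorem foldl_preStep_none (n : Int) : ∀ l : List String, l.foldl (preStep n) none = none := by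
  intro l
  induction l with
  | nil => rfl
  | cons c cs ih => simpa [preStep] using ih

theorem foldInv {n : Int} : ∀ (cmd : List String) (a : AState) (b : BState),
    CoupInv n a b →
    (cmd.foldl (preStep n) (some (b.curr, b.stack.reverse))).isSome = true →
    CoupInv n (cmd.foldl stepA a) (cmd.foldl stepB b) := by
  intro cmd
  induction cmd with
  | nil => intro a b hI _; exact hI
  | cons c cs ih =>
    intro a b hI hpre
    simp only [List.foldl] at hpre ⊢
    cases hp0 : preStep n (some (b.curr, b.stack.reverse)) c with
    | none => rw [hp0, foldl_preStep_none] at hpre; cases hpre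
    | some p' =>
      obtain ⟨hI', hp'⟩ := stepPreserve hI hp0
      rw [hp0, hp'] at hpre
      exact ih (stepA a c) (stepB b c) hI' hpre

theorem aliveC_rep {n : Int} {t : Int} (ht : 0 ≤ t) :
    aliveC (List.replicate n.toNat 'O') t = decide (t < n) := by
  rw [aliveC_nonneg_eq ht]
  by_cases h : t < n
  · rw [List.getD_eq_getElem _ _ (by simp; omega)]
    simp [h]
  · rw [List.getD_eq_getElem?_getD, List.getElem?_eq_none (by simp; omega)]
    simp [h]

theorem initCoup {n k : Int} (h2 : 2 ≤ n) :
    CoupInv n ⟨initA n, List.replicate n.toNat 'O', k, []⟩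
      ⟨List.replicate n.toNat 'O', k, []⟩ := by
  refine ⟨rfl, rfl, by simp; omega, ?_, rfl, ?_⟩
  · intro i hi0 hin _
    rw [getI_initA hi0 hin]
    have hprv : prvB (List.replicate n.toNat 'O') i =
        (if i = 0 then none else some (i - 1)) := by
      by_cases h : i = 0
      · subst h
        rw [if_pos rfl, prvB_none]
        intro t ht1 ht2; omega
      · rw [if_neg h, prvB_some]
        exact ⟨by omega, by omega, by rw [aliveC_rep (by omega)]; simp; omega,
          fun t ht1 ht2 => by omega⟩
    have hnxt : nxtB (List.replicate n.toNat 'O') i =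
        (if i = n - 1 then none else some (i + 1)) := by
      by_cases h : i = n - 1
      · subst h
        rw [if_pos rfl, nxtB_none]
        intro t ht1 ht2
        rw [aliveC_rep (by omega)]
        simp
        omega
      · rw [if_neg h, nxtB_some]
        refine ⟨by omega, by simp; omega, by rw [aliveC_rep (by omega)]; simp; omega,
          fun t ht1 ht2 => by omega⟩
    unfold canonNode canonPrev canonNext
    rw [hprv, hnxt]
    by_cases h0 : i = 0
    · subst h0
      rw [if_pos rfl, if_pos rfl, if_neg (by omega)]
    · by_cases hl : i = n - 1
      · subst hl
        rw [if_neg h0, if_pos rfl, if_neg h0, if_pos rfl]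
      · rw [if_neg h0, if_neg hl, if_neg h0, if_neg hl]
  · intro i hi0 hin hdd
    rw [aliveC_rep hi0] at hdd
    simp at hdd
    omega

-- for n ≤ 1 no command can change any state (every effective command is rejected by Pre_)
theorem frozenStep {n : Int} (h1 : n ≤ 1) {cur : Int} {c : String} {p' : Int × List Int}
    (hP : preStep n (some (cur, ([] : List Int))) c = some p') :
    p' = (cur, []) ∧ (∀ a : AState, stepA a c = a) ∧ (∀ b : BState, stepB b c = b) := by
  unfold preStep at hP
  dsimp only at hP
  by_cases hL : 3 ≤ PySem.Str.len c
  · rw [if_pos hL] at hP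
    cases hsp : PySem.Str.split₀ c with
    | nil => rw [hsp] at hP; cases hP
    | cons t0 rest =>
      rw [hsp] at hP
      dsimp only at hP
      by_cases hDU : t0 = "D" ∨ t0 = "U"
      · rw [if_pos hDU] at hP
        cases hr : rest.head? with
        | none => rw [hr] at hP; cases hP
        | some t1 =>
          rw [hr] at hP
          dsimp only at hP
          cases rest with
          | nil => cases hr
          | cons r rs =>
            have hrt : t1 = r := by symm; simpa using hr
            subst hrt
            cases hx : PySem.Int.ofStr? t1 with
            | none => rw [hx] at hP; cases hP
            | some x =>
              rw [hx] at hP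
              dsimp only at hP
              cases hm : x.toNat with
              | succ m =>
                rw [hm] at hP
                exfalso
                simp only [preMove] at hP
                by_cases hcond : 0 ≤ cur ∧ cur < n ∧ ¬ ([] : List Int).contains cur = true
                case neg => rw [if_neg hcond] at hP; simp at hP
                case pos =>
                  rw [if_pos hcond] at hP
                  obtain ⟨hcc0, hccn, -⟩ := hcond
                  have hc0 : cur = 0 := by omega
                  subst hc0
                  have hnn : preNxt n ([] : List Int) 0 = none := by
                    unfold preNxt
                    rw [PySem.List.pyRange_one_eq_nil (by omega)]
                    rfl
                  have hpn : prePrv ([] : List Int) 0 = none := by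
                    unfold prePrv
                    rw [PySem.List.pyRange_neg_one_eq_nil (by omega)]
                    rfl
                  cases hd : (t0 == "D")
                  · rw [hd, if_neg (by simp), hpn] at hP
                    simp at hP
                  · rw [hd, if_pos rfl, hnn] at hP
                    simp at hP
              | zero =>
                rw [hm] at hP
                simp only [preMove, Option.map_some] at hP
                cases hP
                refine ⟨rfl, ?_, ?_⟩
                · intro a
                  obtain ⟨ad, ares, acur, astk⟩ := a
                  unfold stepA
                  rw [if_pos hL, hsp]
                  dsimp only [List.headD, List.getD, List.head?, List.getElem?_cons_succ,
                    List.getElem?_cons_zero, Option.getD_some]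
                  rcases hDU with hD | hU
                  · subst hD
                    rw [if_pos rfl, hx]
                    simp [hm]
                  · subst hU
                    rw [if_neg (by simp), if_pos rfl, hx]
                    simp [hm]
                · intro b
                  obtain ⟨bres, bcur, bstk⟩ := b
                  unfold stepB
                  rw [if_pos hL, hsp]
                  dsimp only [List.headD, List.getD, List.head?, List.getElem?_cons_succ,
                    List.getElem?_cons_zero, Option.getD_some]
                  rcases hDU with hD | hU
                  · subst hD
                    rw [if_pos rfl, hx]
                    simp [hm]
                  · subst hU
                    rw [if_neg (by simp), if_pos rfl, hx]
                    simp [hm]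
      · rw [if_neg hDU] at hP
        cases hP
        push Not at hDU
        refine ⟨rfl, ?_, ?_⟩
        · intro a
          unfold stepA
          rw [if_pos hL, hsp]
          dsimp only [List.headD]
          rw [if_neg hDU.1, if_neg hDU.2]
        · intro b
          unfold stepB
          rw [if_pos hL, hsp]
          dsimp only [List.headD]
          rw [if_neg hDU.1, if_neg hDU.2]
  · rw [if_neg hL] at hP
    by_cases hC : c = "C"
    · rw [if_pos hC] at hP
      by_cases hcond : 0 ≤ cur ∧ cur < n ∧ ¬ ([] : List Int).contains cur = true
      · exfalso
        rw [if_pos hcond] at hP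
        obtain ⟨hc0, hcn, -⟩ := hcond
        have hc0' : cur = 0 := by omega
        subst hc0'
        have hnn : preNxt n ([] : List Int) 0 = none := by
          unfold preNxt
          rw [PySem.List.pyRange_one_eq_nil (by omega)]
          rfl
        have hpn : prePrv ([] : List Int) 0 = none := by
          unfold prePrv
          rw [PySem.List.pyRange_neg_one_eq_nil (by omega)]
          rfl
        rw [hnn, hpn] at hP
        cases hP
      · rw [if_neg hcond] at hP
        cases hP
    · by_cases hZ : c = "Z"
      · rw [if_neg hC, if_pos hZ] at hP
        cases hP
      · rw [if_neg hC, if_neg hZ] at hP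
        cases hP
        refine ⟨rfl, ?_, ?_⟩
        · intro a
          unfold stepA
          rw [if_neg hL, if_neg hC, if_neg hZ]
        · intro b
          unfold stepB
          rw [if_neg hL, if_neg hC, if_neg hZ]

theorem frozenFold {n : Int} (h1 : n ≤ 1) : ∀ (cmd : List String) (cur : Int),
    (cmd.foldl (preStep n) (some (cur, ([] : List Int)))).isSome = true →
    (∀ a : AState, cmd.foldl stepA a = a) ∧ (∀ b : BState, cmd.foldl stepB b = b) := by
  intro cmd
  induction cmd with
  | nil => intro cur _; exact ⟨fun a => rfl, fun b => rfl⟩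
  | cons c cs ih =>
    intro cur hpre
    simp only [List.foldl] at hpre
    cases hp0 : preStep n (some (cur, ([] : List Int))) c with
    | none => rw [hp0, foldl_preStep_none] at hpre; cases hpre
    | some p' =>
      obtain ⟨hp', hA, hB⟩ := frozenStep h1 hp0
      rw [hp0, hp'] at hpre
      obtain ⟨ihA, ihB⟩ := ih cur hpre
      exact ⟨fun a => by simp only [List.foldl, hA a]; exact ihA a,
             fun b => by simp only [List.foldl, hB b]; exact ihB b⟩

theorem witness_ok : Dom_solution (pvWitness_solution.1) (pvWitness_solution.2.1) (pvWitness_solution.2.2) ∧ Pre_solution (pvWitness_solution.1) (pvWitness_solution.2.1) (pvWitness_solution.2.2) := by decide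

-- ===== VERDICT (by name: the statement is the Claim_ definition above) =====
theorem solution_spec : Claim_equal_solution := by
  intro n k cmd hdom hpre
  unfold Spec_solution solution solution_alt
  unfold Pre_solution at hpre
  by_cases h2 : 2 ≤ n
  · have h := foldInv cmd ⟨initA n, List.replicate n.toNat 'O', k, []⟩
      ⟨List.replicate n.toNat 'O', k, []⟩ (initCoup h2) (by simpa using hpre)
    exact congrArg String.ofList h.1
  · obtain ⟨hA, hB⟩ := frozenFold (by omega) cmd k hpre
    rw [hA, hB]
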